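-- pv_equiv track=rewrite | github.com/oscarhill2012/circuit-tutor | frontend/api/circuit_validator.py | _block_path_blocks
-- ===== SOURCE A (Python) =====
-- from collections import defaultdict
--
-- def _block_path_blocks(block_id, adj, na, nb):
--     """Block-cut tree path from na to nb. Returns the set of block_ids on the
--     unique path between na and nb in the block-cut tree, or None if na and nb
--     are in different connected components."""
--     if na == nb:
--         return set()
--     block_nodes = defaultdict(set)
--     for u, neigh in adj.items():
--         for v, eid in neigh:
--             b = block_id.get(eid)
--             if b is None:
--                 continue
--             block_nodes[b].add(u)
--             block_nodes[b].add(v)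
--     node_blocks = defaultdict(set)
--     for b, ns in block_nodes.items():
--         for n in ns:
--             node_blocks[n].add(b)
--
--     if na not in node_blocks or nb not in node_blocks:
--         return None
--
--     # Block-cut tree: tagged nodes ('n', node_id) and ('b', block_id).
--     tree = defaultdict(list)
--     for n, bs in node_blocks.items():
--         for b in bs:
--             tree[('n', n)].append(('b', b))
--             tree[('b', b)].append(('n', n))
--
--     src, dst = ('n', na), ('n', nb)
--     parent = {src: None}
--     queue = [src]
--     head = 0
--     while head < len(queue):
--         u = queue[head]
--         head += 1
--         if u == dst:
--             break
--         for v in tree[u]: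
--             if v not in parent:
--                 parent[v] = u
--                 queue.append(v)
--     if dst not in parent:
--         return None
--     blocks = set()
--     cur = dst
--     while cur is not None:
--         if cur[0] == 'b':
--             blocks.add(cur[1])
--         cur = parent[cur]
--     return blocks
-- ===== SOURCE B (Python) =====
-- from collections import defaultdict
--
-- def _block_path_blocks(block_id, adj, na, nb):
--     """Block-cut tree path from na to nb: the tagged tree is built directly in
--     one pass over the adjacency lists, and the path is found by an iterative
--     depth-first search that keeps the current path on an explicit stack; on
--     success the stack is unwound, collecting the block vertices on it."""
--     if na == nb:
--         return set()
--     tree = defaultdict(set)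
--     for u, neigh in adj.items():
--         for v, eid in neigh:
--             b = block_id.get(eid)
--             if b is None:
--                 continue
--             for n in (u, v):
--                 tree[('n', n)].add(('b', b))
--                 tree[('b', b)].add(('n', n))
--     src, dst = ('n', na), ('n', nb)
--     if src not in tree or dst not in tree:
--         return None
--     visited = {src}
--     path = [src]
--     while path:
--         top = path[-1]
--         if top == dst:
--             blocks = set()
--             while path:
--                 v = path.pop()
--                 if v[0] == 'b':
--                     blocks.add(v[1])
--             return blocks
--         for v in tree[top]:
--             if v not in visited:
--                 visited.add(v)
--                 path.append(v)
--                 break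
--         else:
--             path.pop()
--     return None
-- ===== Notes on version B (the rewrite author's own statement) =====
-- stated objective: alternative
-- what changed: A's three staged passes (block_nodes, node_blocks, then the tagged tree) plus a BFS with a parent dictionary and pointer backtracking are replaced by building the tagged block-cut tree directly in one pass and finding the path by an iterative depth-first search that keeps the current path on an explicit stack, collecting the block vertices while unwinding it; Pre_ excludes inputs whose derived node-block incidence graph contains a cycle, where the block set returned depends on the unspecified traversal/hash order and neither value is canonical.
-- outside the precondition, e.g. on _block_path_blocks({1: 1, 3: 3}, {2: [(4, 3)], 1: [(4, 1), (3, 3)]}, 1, 3): A returns {3}, B returns {1, 3}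
import Mathlib
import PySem

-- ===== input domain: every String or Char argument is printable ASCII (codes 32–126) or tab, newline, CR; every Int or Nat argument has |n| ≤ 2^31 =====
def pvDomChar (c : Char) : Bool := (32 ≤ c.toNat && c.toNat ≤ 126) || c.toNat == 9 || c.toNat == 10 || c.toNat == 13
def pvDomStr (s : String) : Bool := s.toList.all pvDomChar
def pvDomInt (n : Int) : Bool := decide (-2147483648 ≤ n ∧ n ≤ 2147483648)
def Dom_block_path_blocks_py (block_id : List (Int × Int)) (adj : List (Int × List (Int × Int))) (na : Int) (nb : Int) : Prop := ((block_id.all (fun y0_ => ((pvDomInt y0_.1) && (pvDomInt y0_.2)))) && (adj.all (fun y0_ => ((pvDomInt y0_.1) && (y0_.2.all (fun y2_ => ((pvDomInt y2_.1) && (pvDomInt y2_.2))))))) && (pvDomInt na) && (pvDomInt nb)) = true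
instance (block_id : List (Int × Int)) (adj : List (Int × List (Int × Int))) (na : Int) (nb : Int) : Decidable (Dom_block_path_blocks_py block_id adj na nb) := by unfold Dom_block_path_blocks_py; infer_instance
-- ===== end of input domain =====

-- B builds the tagged block-cut tree directly in one pass (instead of A's three
-- staged dictionaries) and finds the path by an iterative depth-first search
-- keeping the current path on an explicit stack (instead of A's BFS with a
-- parent dictionary and pointer backtracking); objective: alternative, same
-- exact result on the stated precondition.

-- tagged block-cut-tree vertices ('n', node) / ('b', block)
abbrev BpbV : Type := String × Int

-- ===== PORT A =====
-- block_nodes = defaultdict(set); block_nodes[b].add(u); block_nodes[b].add(v)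
def bpbBlockNodesA (block_id : List (Int × Int)) (adj : List (Int × List (Int × Int))) : PySem.Dict Int (PySem.Set Int) :=
  adj.foldl (fun bn p =>
    p.2.foldl (fun bn q =>
      match (PySem.Dict.mk block_id).get? q.2 with
      | none => bn
      | some b => bn.modify b PySem.Set.empty (fun s => PySem.Set.add (PySem.Set.add s p.1) q.1))
      bn)
    PySem.Dict.empty

-- node_blocks = defaultdict(set); for b, ns: for n in ns: node_blocks[n].add(b)
def bpbNodeBlocksA (bn : PySem.Dict Int (PySem.Set Int)) : PySem.Dict Int (PySem.Set Int) :=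
  bn.items.foldl (fun nb p =>
    p.2.foldl (fun nb n => nb.modify n PySem.Set.empty (fun s => PySem.Set.add s p.1)) nb)
    PySem.Dict.empty

-- tree = defaultdict(list); both tagged directions appended
def bpbTreeA (nbk : PySem.Dict Int (PySem.Set Int)) : PySem.Dict BpbV (List BpbV) :=
  nbk.items.foldl (fun t p =>
    p.2.foldl (fun t b =>
      ((t.modify ("n", p.1) [] (· ++ [("b", b)])).modify ("b", b) [] (· ++ [("n", p.1)])))
      t)
    PySem.Dict.empty

-- for v in tree[u]: if v not in parent: parent[v] = u; queue.append(v)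
def bpbStepA (tree : PySem.Dict BpbV (List BpbV)) (u : BpbV)
    (st : PySem.Dict BpbV (Option BpbV) × List BpbV) : PySem.Dict BpbV (Option BpbV) × List BpbV :=
  (tree.getD u []).foldl
    (fun st v => if (st.1.get? v).isSome then st else (st.1.insert v (some u), st.2 ++ [v])) st

-- while head < len(queue): u = queue[head]; head += 1; if u == dst: break; …
-- (fuel makes the loop structurally recursive; bpbFuelA is always enough)
def bpbLoopA (tree : PySem.Dict BpbV (List BpbV)) (dst : BpbV) :
    Nat → PySem.Dict BpbV (Option BpbV) × List BpbV → Nat → PySem.Dict BpbV (Option BpbV)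
  | 0, st, _ => st.1
  | f + 1, st, head =>
    if head < st.2.length then
      let u := st.2.getD head ("", 0)
      if u = dst then st.1
      else bpbLoopA tree dst f (bpbStepA tree u st) (head + 1)
    else st.1

-- while cur is not None: if cur[0] == 'b': blocks.add(cur[1]); cur = parent[cur]
-- (parent[cur] can never raise KeyError on reachable states; getD none is the guard)
def bpbBackA (parent : PySem.Dict BpbV (Option BpbV)) :
    Nat → PySem.Set Int → Option BpbV → PySem.Set Int
  | 0, blocks, _ => blocks
  | _ + 1, blocks, none => blocks
  | f + 1, blocks, some c =>
    bpbBackA parent f (if c.1 = "b" then PySem.Set.add blocks c.2 else blocks)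
      ((parent.get? c).getD none)

def bpbFuelA (tree : PySem.Dict BpbV (List BpbV)) : Nat := tree.values.flatten.length + 2

-- if dst not in parent: return None … return blocks
def bpbFinA (parent : PySem.Dict BpbV (Option BpbV)) (dst : BpbV) : Option (List Int) :=
  if parent.contains dst then some (bpbBackA parent (parent.size + 2) PySem.Set.empty (some dst))
  else none

def block_path_blocks_py (block_id : List (Int × Int)) (adj : List (Int × List (Int × Int))) (na : Int) (nb : Int) : Option (List Int) :=
  if na = nb then some []
  else
    let nbk := bpbNodeBlocksA (bpbBlockNodesA block_id adj)
    if !(nbk.contains na) || !(nbk.contains nb) then none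
    else
      let tree := bpbTreeA nbk
      let src : BpbV := ("n", na)
      let dst : BpbV := ("n", nb)
      bpbFinA (bpbLoopA tree dst (bpbFuelA tree) (PySem.Dict.empty.insert src none, [src]) 0) dst

-- ===== PORT B =====
-- tree = defaultdict(set); built in one pass: for n in (u, v): tree[('n',n)].add(('b',b)); tree[('b',b)].add(('n',n))
def bpbTreeB (block_id : List (Int × Int)) (adj : List (Int × List (Int × Int))) : PySem.Dict BpbV (PySem.Set BpbV) :=
  adj.foldl (fun t p =>
    p.2.foldl (fun t q =>
      match (PySem.Dict.mk block_id).get? q.2 with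
      | none => t
      | some b =>
        [p.1, q.1].foldl (fun t n =>
          (t.modify ("n", n) PySem.Set.empty (fun s => PySem.Set.add s ("b", b))).modify
            ("b", b) PySem.Set.empty (fun s => PySem.Set.add s ("n", n))) t)
      t)
    PySem.Dict.empty

-- blocks = set(); while path: v = path.pop(); if v[0] == 'b': blocks.add(v[1])
-- (the path stack is kept top-at-head, so pop() is the list head)
def bpbCollectB : List BpbV → PySem.Set Int → PySem.Set Int
  | [], blocks => blocks
  | v :: rest, blocks => bpbCollectB rest (if v.1 = "b" then PySem.Set.add blocks v.2 else blocks)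

-- while path: top = path[-1]; if top == dst: unwind; for v in tree[top]: first
-- unvisited is pushed (break), else (for-else) path.pop()
-- (fuel makes the loop structural; bpbFuelB is always enough)
def bpbLoopB (tree : PySem.Dict BpbV (PySem.Set BpbV)) (dst : BpbV) :
    Nat → PySem.Set BpbV → List BpbV → Option (List Int)
  | 0, _, _ => none
  | f + 1, visited, path =>
    match path with
    | [] => none
    | top :: rest =>
      if top = dst then some (bpbCollectB (top :: rest) PySem.Set.empty)
      else
        match (tree.getD top PySem.Set.empty).find? (fun v => !(visited.contains v)) with
        | some v => bpbLoopB tree dst f (PySem.Set.add visited v) (v :: top :: rest)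
        | none => bpbLoopB tree dst f visited rest

def bpbFuelB (tree : PySem.Dict BpbV (PySem.Set BpbV)) : Nat := 2 * tree.values.flatten.length + 4

def block_path_blocks_py_alt (block_id : List (Int × Int)) (adj : List (Int × List (Int × Int))) (na : Int) (nb : Int) : Option (List Int) :=
  if na = nb then some []
  else
    let tree := bpbTreeB block_id adj
    let src : BpbV := ("n", na)
    let dst : BpbV := ("n", nb)
    if !(tree.contains src) || !(tree.contains dst) then none
    else bpbLoopB tree dst (bpbFuelB tree) (PySem.Set.add PySem.Set.empty src) [src]

-- ===== PRECONDITION & SPEC =====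
-- the tagged (node, block) incidence edges both programs derive from block_id/adj
def bpbInc (block_id : List (Int × Int)) (adj : List (Int × List (Int × Int))) :
    List (BpbV × BpbV) :=
  adj.flatMap (fun p => p.2.flatMap (fun q =>
    match (PySem.Dict.mk block_id).get? q.2 with
    | none => []
    | some b => [((("n", p.1) : BpbV), (("b", b) : BpbV)), ((("n", q.1) : BpbV), (("b", b) : BpbV))]))

-- one union step of a component list; none = the edge closes a cycle
def bpbAddEdge (cs : List (List BpbV)) (e : BpbV × BpbV) :
    Option (List (List BpbV)) :=
  let touching := cs.filter (fun c => c.contains e.1 || c.contains e.2)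
  if touching.any (fun c => c.contains e.1 && c.contains e.2) then none
  else some ((e.1 :: e.2 :: touching.flatten) :: cs.filter (fun c => !(c.contains e.1 || c.contains e.2)))

def bpbAcyclic (block_id : List (Int × Int)) (adj : List (Int × List (Int × Int))) : Bool :=
  ((PySem.List.dedup (bpbInc block_id adj)).foldl (fun acc e => acc.bind (fun cs => bpbAddEdge cs e))
    (some [])).isSome

-- Pre_ excludes inputs whose derived node–block incidence graph contains a cycle
-- (block_id/adj then do not describe a genuine block decomposition): there the
-- chosen path, hence the returned block set, is an accident of the unspecified
-- traversal/hash order, which neither program specifies.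
def Pre_block_path_blocks_py (block_id : List (Int × Int)) (adj : List (Int × List (Int × Int))) (na : Int) (nb : Int) : Prop :=
  na = nb ∨ ¬ ((("n", na) : BpbV) ∈ (bpbInc block_id adj).map (·.1)) ∨
    ¬ ((("n", nb) : BpbV) ∈ (bpbInc block_id adj).map (·.1)) ∨ bpbAcyclic block_id adj = true
instance (block_id : List (Int × Int)) (adj : List (Int × List (Int × Int))) (na : Int) (nb : Int) : Decidable (Pre_block_path_blocks_py block_id adj na nb) := by unfold Pre_block_path_blocks_py; infer_instance

def pvWitness_block_path_blocks_py : (List (Int × Int)) × (List (Int × List (Int × Int))) × Int × Int :=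
  ([(1, 10)], [(1, [(2, 1)]), (2, [(1, 1)])], 1, 2)

def Spec_block_path_blocks_py (block_id : List (Int × Int)) (adj : List (Int × List (Int × Int))) (na : Int) (nb : Int) (out : Option (List Int)) : Prop := out = block_path_blocks_py_alt block_id adj na nb
instance (block_id : List (Int × Int)) (adj : List (Int × List (Int × Int))) (na : Int) (nb : Int) (out : Option (List Int)) : Decidable (Spec_block_path_blocks_py block_id adj na nb out) := by unfold Spec_block_path_blocks_py; infer_instance

-- ===== CLAIM (what is proved, stated in full; the proofs are below) =====
def Claim_equal_block_path_blocks_py : Prop := ∀ (block_id : List (Int × Int)) (adj : List (Int × List (Int × Int))) (na : Int) (nb : Int), Dom_block_path_blocks_py block_id adj na nb → Pre_block_path_blocks_py block_id adj na nb → Spec_block_path_blocks_py block_id adj na nb (block_path_blocks_py block_id adj na nb)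

-- ===== LEMMAS AND PROOFS =====

-- ---- walks, paths and unique-path property over an edge list ----

-- the symmetric step relation of an undirected edge list
def bpbE (E : List (BpbV × BpbV)) (x y : BpbV) : Prop :=
  ∃ e ∈ E, (x = e.1 ∧ y = e.2) ∨ (x = e.2 ∧ y = e.1)

lemma bpbE_symm {E : List (BpbV × BpbV)} {x y : BpbV} (h : bpbE E x y) : bpbE E y x := by
  obtain ⟨e, he, h⟩ := h
  exact ⟨e, he, h.symm.imp (fun h => ⟨h.2, h.1⟩) (fun h => ⟨h.2, h.1⟩)⟩

def bpbWalk (R : BpbV → BpbV → Prop) (w : List BpbV) (a b : BpbV) : Prop :=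
  w.IsChain R ∧ w.head? = some a ∧ w.getLast? = some b

def bpbReach (R : BpbV → BpbV → Prop) (a b : BpbV) : Prop := ∃ w, bpbWalk R w a b

def bpbIsPath (R : BpbV → BpbV → Prop) (p : List BpbV) (a b : BpbV) : Prop :=
  bpbWalk R p a b ∧ p.Nodup

def bpbUP (R : BpbV → BpbV → Prop) : Prop :=
  ∀ a b p q, bpbIsPath R p a b → bpbIsPath R q a b → p = q

lemma bpbReach_rev {R : BpbV → BpbV → Prop} (hs : ∀ x y, R x y → R y x)
    {a b : BpbV} (h : bpbReach R a b) : bpbReach R b a := by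
  obtain ⟨w, hc, hh, hl⟩ := h
  exact ⟨w.reverse, List.isChain_reverse.2 (hc.imp (fun x y h => hs x y h)),
    by rwa [List.head?_reverse], by rwa [List.getLast?_reverse]⟩

lemma bpbReach_trans {R : BpbV → BpbV → Prop} {a b c : BpbV}
    (h1 : bpbReach R a b) (h2 : bpbReach R b c) : bpbReach R a c := by
  obtain ⟨w1, hc1, hh1, hl1⟩ := h1
  obtain ⟨w2, hc2, hh2, hl2⟩ := h2
  cases w2 with
  | nil => simp at hh2
  | cons x t =>
    obtain rfl : b = x := by symm; simpa using hh2
    cases t with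
    | nil =>
      obtain rfl : b = c := by simpa using hl2
      exact ⟨w1, hc1, hh1, hl1⟩
    | cons y t' =>
      refine ⟨w1 ++ y :: t', ?_, ?_, ?_⟩
      · refine List.isChain_append.2 ⟨hc1, (List.isChain_cons_cons.1 hc2).2, ?_⟩
        intro u hu v hv
        simp only [List.head?_cons, Option.mem_def, Option.some.injEq] at hv
        rw [hl1] at hu
        obtain rfl : u = b := by symm; simpa using hu
        rw [← hv]
        exact (List.isChain_cons_cons.1 hc2).1
      · cases w1 with
        | nil => simp at hh1
        | cons z zs => simpa using hh1
      · rw [List.getLast?_append_of_ne_nil w1 (l₂ := y :: t') (by simp)]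
        simpa using hl2

lemma bpbWalk_closed_aux {R : BpbV → BpbV → Prop} (S : BpbV → Prop)
    (hcl : ∀ x, S x → ∀ y, R x y → S y) :
    ∀ (w : List BpbV) (a b : BpbV), w.IsChain R → w.head? = some a → w.getLast? = some b →
      S a → S b := by
  intro w
  induction w with
  | nil => intro a b _ hh _ _; simp at hh
  | cons x t ih =>
    intro a b hc hh hl ha
    obtain rfl : a = x := by symm; simpa using hh
    cases t with
    | nil => obtain rfl : b = a := by symm; simpa using hl
             exact ha
    | cons y t' =>
      exact ih y b (List.isChain_cons_cons.1 hc).2 rfl (by simpa using hl)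
        (hcl a ha y (List.isChain_cons_cons.1 hc).1)

-- closed-set lemma: a walk starting in an adjacency-closed set stays inside it
lemma bpbClosed_no_reach {R : BpbV → BpbV → Prop} (S : BpbV → Prop)
    (hcl : ∀ x, S x → ∀ y, R x y → S y) {a b : BpbV} (ha : S a) (hb : ¬ S b) :
    ¬ bpbReach R a b := by
  rintro ⟨w, hc, hh, hl⟩
  exact hb (bpbWalk_closed_aux S hcl w a b hc hh hl ha)

-- ---- unique paths from the union-find precondition ----

def bpbPartOK (cs : List (List BpbV)) (E : List (BpbV × BpbV)) : Prop :=
  cs.Pairwise List.Disjoint ∧ ∀ e ∈ E, ∃ c ∈ cs, e.1 ∈ c ∧ e.2 ∈ c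

lemma bpb_disjoint_eq {cs : List (List BpbV)} (hp : cs.Pairwise List.Disjoint)
    {c c' : List BpbV} {x : BpbV} (hc : c ∈ cs) (hc' : c' ∈ cs) (hx : x ∈ c) (hx' : x ∈ c') :
    c = c' := by
  induction cs with
  | nil => simp at hc
  | cons h t ih =>
    rcases List.mem_cons.1 hc with rfl | hct
    · rcases List.mem_cons.1 hc' with rfl | hct'
      · rfl
      · exact absurd hx' (((List.pairwise_cons.1 hp).1 c' hct') hx)
    · rcases List.mem_cons.1 hc' with rfl | hct'
      · exact absurd hx (((List.pairwise_cons.1 hp).1 c hct) hx')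
      · exact ih (List.pairwise_cons.1 hp).2 hct hct'

lemma bpb_comp_reach_aux {cs : List (List BpbV)} {E : List (BpbV × BpbV)}
    (hp : bpbPartOK cs E) :
    ∀ (w : List BpbV) (a b : BpbV), w.IsChain (bpbE E) → w.head? = some a →
      w.getLast? = some b → (a = b ∨ ∃ c ∈ cs, a ∈ c ∧ b ∈ c) := by
  intro w
  induction w with
  | nil => intro a b _ hh _; simp at hh
  | cons x t ih =>
    intro a b hc hh hl
    obtain rfl : a = x := by symm; simpa using hh
    cases t with
    | nil => left; simpa using hl
    | cons y t' =>
      have hay : bpbE E a y := (List.isChain_cons_cons.1 hc).1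
      obtain ⟨e, he, hor⟩ := hay
      obtain ⟨c, hcs, h1, h2⟩ := hp.2 e he
      have hac : a ∈ c ∧ y ∈ c := by
        rcases hor with ⟨rfl, rfl⟩ | ⟨rfl, rfl⟩
        · exact ⟨h1, h2⟩
        · exact ⟨h2, h1⟩
      rcases ih y b (List.isChain_cons_cons.1 hc).2 rfl (by simpa using hl) with rfl | ⟨c', hcs', hy', hb'⟩
      · exact Or.inr ⟨c, hcs, hac.1, hac.2⟩
      · have := bpb_disjoint_eq hp.1 hcs hcs' hac.2 hy'
        subst this
        exact Or.inr ⟨c, hcs, hac.1, hb'⟩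

lemma bpb_comp_reach {cs : List (List BpbV)} {E : List (BpbV × BpbV)}
    (hp : bpbPartOK cs E) {a b : BpbV} (h : bpbReach (bpbE E) a b) :
    a = b ∨ ∃ c ∈ cs, a ∈ c ∧ b ∈ c := by
  obtain ⟨w, hc, hh, hl⟩ := h
  exact bpb_comp_reach_aux hp w a b hc hh hl

lemma bpbE_append_single {E : List (BpbV × BpbV)} {e : BpbV × BpbV} {x y : BpbV} :
    bpbE (E ++ [e]) x y ↔ bpbE E x y ∨ ((x = e.1 ∧ y = e.2) ∨ (x = e.2 ∧ y = e.1)) := by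
  constructor
  · rintro ⟨e', he', h⟩
    rcases List.mem_append.1 he' with h1 | h1
    · exact Or.inl ⟨e', h1, h⟩
    · obtain rfl : e' = e := by simpa using h1
      exact Or.inr h
  · rintro (⟨e', he', h⟩ | h)
    · exact ⟨e', List.mem_append_left _ he', h⟩
    · exact ⟨e, List.mem_append_right _ (by simp), h⟩

lemma bpbChain_drop_e {E : List (BpbV × BpbV)} {e : BpbV × BpbV} :
    ∀ l : List BpbV, l.IsChain (bpbE (E ++ [e])) → ¬ (e.1 ∈ l ∧ e.2 ∈ l) →
      l.IsChain (bpbE E) := by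
  intro l
  induction l with
  | nil => intro _ _; simp
  | cons x t ih =>
    intro hc hm
    cases t with
    | nil => simp
    | cons y t' =>
      obtain ⟨hxy, hrest⟩ := List.isChain_cons_cons.1 hc
      rcases bpbE_append_single.1 hxy with h | h
      · refine List.isChain_cons_cons.2 ⟨h, ih hrest ?_⟩
        rintro ⟨h1, h2⟩
        exact hm ⟨List.mem_cons_of_mem _ h1, List.mem_cons_of_mem _ h2⟩
      · exfalso
        rcases h with ⟨rfl, rfl⟩ | ⟨rfl, rfl⟩
        · exact hm ⟨List.mem_cons_self, List.mem_cons_of_mem _ List.mem_cons_self⟩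
        · exact hm ⟨List.mem_cons_of_mem _ List.mem_cons_self, List.mem_cons_self⟩

lemma bpbDecomp {E : List (BpbV × BpbV)} {e : BpbV × BpbV} :
    ∀ p : List BpbV, p.IsChain (bpbE (E ++ [e])) → p.Nodup →
      ¬ bpbE E e.1 e.2 →
      p.IsChain (bpbE E) ∨
        ∃ p1 p2, p = p1 ++ p2 ∧ p1 ≠ [] ∧ p2 ≠ [] ∧ p1.IsChain (bpbE E) ∧ p2.IsChain (bpbE E) ∧
          ((p1.getLast? = some e.1 ∧ p2.head? = some e.2) ∨
           (p1.getLast? = some e.2 ∧ p2.head? = some e.1)) := by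
  intro p
  induction p with
  | nil => intro _ _ _; left; simp
  | cons x t ih =>
    intro hc hnd hno
    cases t with
    | nil => left; simp
    | cons y t' =>
      obtain ⟨hxy, hrest⟩ := List.isChain_cons_cons.1 hc
      by_cases hstep : (x = e.1 ∧ y = e.2) ∨ (x = e.2 ∧ y = e.1)
      · right
        refine ⟨[x], y :: t', by simp, by simp, by simp, by simp, ?_, ?_⟩
        · refine bpbChain_drop_e (y :: t') hrest ?_
          rintro ⟨h1, h2⟩
          rcases hstep with ⟨rfl, -⟩ | ⟨rfl, -⟩
          · exact (List.nodup_cons.1 hnd).1 h1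
          · exact (List.nodup_cons.1 hnd).1 h2
        · rcases hstep with ⟨rfl, rfl⟩ | ⟨rfl, rfl⟩
          · exact Or.inl ⟨by simp, by simp⟩
          · exact Or.inr ⟨by simp, by simp⟩
      · have hExy : bpbE E x y := by
          rcases bpbE_append_single.1 hxy with h | h
          · exact h
          · exact absurd h hstep
        rcases ih hrest (List.nodup_cons.1 hnd).2 hno with hpure | ⟨p1, p2, heq, h1ne, h2ne, hc1, hc2, hor⟩
        · exact Or.inl (List.isChain_cons_cons.2 ⟨hExy, hpure⟩)
        · right
          cases p1 with
          | nil => exact absurd rfl h1ne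
          | cons z p1' =>
            obtain rfl : z = y := by symm; simpa using congrArg List.head? heq
            have ht' : t' = p1' ++ p2 := by simpa using heq
            refine ⟨x :: z :: p1', p2, by simp [ht'], by simp, h2ne,
              List.isChain_cons_cons.2 ⟨hExy, hc1⟩, hc2, ?_⟩
            rcases hor with ⟨h1, h2⟩ | ⟨h1, h2⟩
            · exact Or.inl ⟨by rw [List.getLast?_cons_cons]; exact h1, h2⟩
            · exact Or.inr ⟨by rw [List.getLast?_cons_cons]; exact h1, h2⟩

lemma bpbUP_ext {E : List (BpbV × BpbV)} {e : BpbV × BpbV}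
    (hUP : bpbUP (bpbE E)) (hnr : ¬ bpbReach (bpbE E) e.1 e.2) :
    bpbUP (bpbE (E ++ [e])) := by
  have hsymmE : ∀ x y, bpbE E x y → bpbE E y x := fun _ _ h => bpbE_symm h
  have hnoE : ¬ bpbE E e.1 e.2 := fun h =>
    hnr ⟨[e.1, e.2], by simp [h], by simp, by simp⟩
  intro a b p q hp hq
  obtain ⟨⟨hpc, hph, hpl⟩, hpn⟩ := hp
  obtain ⟨⟨hqc, hqh, hql⟩, hqn⟩ := hq
  rcases bpbDecomp p hpc hpn hnoE with hppure | ⟨p1, p2, rfl, hp1ne, hp2ne, hpc1, hpc2, hpor⟩ <;>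
    rcases bpbDecomp q hqc hqn hnoE with hqpure | ⟨q1, q2, rfl, hq1ne, hq2ne, hqc1, hqc2, hqor⟩
  · exact hUP a b p q ⟨⟨hppure, hph, hpl⟩, hpn⟩ ⟨⟨hqpure, hqh, hql⟩, hqn⟩
  · -- p pure, q split: both tree endpoints reachable in E: contradiction
    exfalso
    rw [List.head?_append_of_ne_nil q1 hq1ne] at hqh
    rw [List.getLast?_append_of_ne_nil q1 hq2ne] at hql
    have hrAB : bpbReach (bpbE E) a b := ⟨p, hppure, hph, hpl⟩
    rcases hqor with ⟨h1, h2⟩ | ⟨h1, h2⟩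
    · exact hnr (bpbReach_trans (bpbReach_trans
        (bpbReach_rev hsymmE ⟨q1, hqc1, hqh, h1⟩) hrAB)
        (bpbReach_rev hsymmE ⟨q2, hqc2, h2, hql⟩))
    · exact hnr (bpbReach_rev hsymmE (bpbReach_trans (bpbReach_trans
        (bpbReach_rev hsymmE ⟨q1, hqc1, hqh, h1⟩) hrAB)
        (bpbReach_rev hsymmE ⟨q2, hqc2, h2, hql⟩)))
  · -- p split, q pure: symmetric
    exfalso
    rw [List.head?_append_of_ne_nil p1 hp1ne] at hph
    rw [List.getLast?_append_of_ne_nil p1 hp2ne] at hpl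
    have hrAB : bpbReach (bpbE E) a b := ⟨q, hqpure, hqh, hql⟩
    rcases hpor with ⟨h1, h2⟩ | ⟨h1, h2⟩
    · exact hnr (bpbReach_trans (bpbReach_trans
        (bpbReach_rev hsymmE ⟨p1, hpc1, hph, h1⟩) hrAB)
        (bpbReach_rev hsymmE ⟨p2, hpc2, h2, hpl⟩))
    · exact hnr (bpbReach_rev hsymmE (bpbReach_trans (bpbReach_trans
        (bpbReach_rev hsymmE ⟨p1, hpc1, hph, h1⟩) hrAB)
        (bpbReach_rev hsymmE ⟨p2, hpc2, h2, hpl⟩)))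
  · -- both split
    rw [List.head?_append_of_ne_nil p1 hp1ne] at hph
    rw [List.getLast?_append_of_ne_nil p1 hp2ne] at hpl
    rw [List.head?_append_of_ne_nil q1 hq1ne] at hqh
    rw [List.getLast?_append_of_ne_nil q1 hq2ne] at hql
    rcases hpor with ⟨hpa, hpb⟩ | ⟨hpa, hpb⟩ <;> rcases hqor with ⟨hqa, hqb⟩ | ⟨hqa, hqb⟩
    · have e1 : p1 = q1 := hUP a e.1 p1 q1
        ⟨⟨hpc1, hph, hpa⟩, List.Nodup.of_append_left hpn⟩
        ⟨⟨hqc1, hqh, hqa⟩, List.Nodup.of_append_left hqn⟩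
      have e2 : p2 = q2 := hUP e.2 b p2 q2
        ⟨⟨hpc2, hpb, hpl⟩, List.Nodup.of_append_right hpn⟩
        ⟨⟨hqc2, hqb, hql⟩, List.Nodup.of_append_right hqn⟩
      rw [e1, e2]
    · exact absurd (bpbReach_trans
        (bpbReach_rev hsymmE ⟨p1, hpc1, hph, hpa⟩) ⟨q1, hqc1, hqh, hqa⟩) hnr
    · exact absurd (bpbReach_rev hsymmE (bpbReach_trans
        (bpbReach_rev hsymmE ⟨p1, hpc1, hph, hpa⟩) ⟨q1, hqc1, hqh, hqa⟩)) hnr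
    · have e1 : p1 = q1 := hUP a e.2 p1 q1
        ⟨⟨hpc1, hph, hpa⟩, List.Nodup.of_append_left hpn⟩
        ⟨⟨hqc1, hqh, hqa⟩, List.Nodup.of_append_left hqn⟩
      have e2 : p2 = q2 := hUP e.1 b p2 q2
        ⟨⟨hpc2, hpb, hpl⟩, List.Nodup.of_append_right hpn⟩
        ⟨⟨hqc2, hqb, hql⟩, List.Nodup.of_append_right hqn⟩
      rw [e1, e2]

lemma bpb_fold_none : ∀ (L : List (BpbV × BpbV)),
    (L.foldl (fun acc e => acc.bind (fun cs => bpbAddEdge cs e)) none) = none := by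
  intro L
  induction L with
  | nil => rfl
  | cons e L ih => simpa using ih

lemma bpbAddEdge_partOK {cs cs' : List (List BpbV)} {E0 : List (BpbV × BpbV)} {e : BpbV × BpbV}
    (hP : bpbPartOK cs E0) (h : bpbAddEdge cs e = some cs') :
    bpbPartOK cs' (E0 ++ [e]) ∧ ¬ ∃ c ∈ cs, e.1 ∈ c ∧ e.2 ∈ c := by
  have hdef : bpbAddEdge cs e = if ((cs.filter (fun c => c.contains e.1 || c.contains e.2)).any
        fun c => c.contains e.1 && c.contains e.2) = true then none
      else some ((e.1 :: e.2 :: (cs.filter (fun c => c.contains e.1 || c.contains e.2)).flatten) ::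
        cs.filter (fun c => !(c.contains e.1 || c.contains e.2))) := rfl
  rw [hdef] at h
  by_cases hany : ((cs.filter (fun c => c.contains e.1 || c.contains e.2)).any
      fun c => c.contains e.1 && c.contains e.2) = true
  · rw [if_pos hany] at h
    exact absurd h (by simp)
  · rw [if_neg hany] at h
    obtain rfl := (Option.some.inj h).symm
    have hnoboth : ¬ ∃ c ∈ cs, e.1 ∈ c ∧ e.2 ∈ c := by
      rintro ⟨c, hc, h1, h2⟩
      refine hany ?_
      simp only [List.any_eq_true]
      exact ⟨c, List.mem_filter.2 ⟨hc, by simp [h1, h2]⟩, by simp [h1, h2]⟩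
    refine ⟨⟨?_, ?_⟩, hnoboth⟩
    · refine List.pairwise_cons.2 ⟨?_, List.Pairwise.sublist List.filter_sublist hP.1⟩
      intro u hu
      have hu' := List.mem_filter.1 hu
      have hu1 : e.1 ∉ u ∧ e.2 ∉ u := by
        have := hu'.2
        simp only [List.contains_eq_mem, Bool.not_eq_eq_eq_not, Bool.not_true,
          Bool.or_eq_false_iff, decide_eq_false_iff_not] at this
        exact this
      intro x hx
      rcases List.mem_cons.1 hx with rfl | hx
      · exact hu1.1
      rcases List.mem_cons.1 hx with rfl | hx
      · exact hu1.2
      · obtain ⟨c, hcT, hxc⟩ := List.mem_flatten.1 hx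
        have hcT' := List.mem_filter.1 hcT
        intro hxu
        have hcu : c = u := bpb_disjoint_eq hP.1 hcT'.1 hu'.1 hxc hxu
        rw [hcu] at hcT'
        have h2 := hu'.2
        rw [hcT'.2] at h2
        simp at h2
    · intro e' he'
      rcases List.mem_append.1 he' with hold | hnew
      · obtain ⟨c, hc, h1, h2⟩ := hP.2 e' hold
        by_cases ht : (c.contains e.1 || c.contains e.2) = true
        · refine ⟨_, List.mem_cons_self, ?_, ?_⟩
          · exact List.mem_cons_of_mem _ (List.mem_cons_of_mem _
              (List.mem_flatten.2 ⟨c, List.mem_filter.2 ⟨hc, ht⟩, h1⟩))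
          · exact List.mem_cons_of_mem _ (List.mem_cons_of_mem _
              (List.mem_flatten.2 ⟨c, List.mem_filter.2 ⟨hc, ht⟩, h2⟩))
        · exact ⟨c, List.mem_cons_of_mem _ (List.mem_filter.2 ⟨hc, by simpa using ht⟩), h1, h2⟩
      · obtain rfl : e' = e := by simpa using hnew
        exact ⟨_, List.mem_cons_self, List.mem_cons_self, List.mem_cons_of_mem _ List.mem_cons_self⟩

lemma bpb_uf_fold : ∀ (L : List (BpbV × BpbV)) (cs : List (List BpbV)) (E0 : List (BpbV × BpbV)),
    bpbPartOK cs E0 → bpbUP (bpbE E0) → (∀ e ∈ L, e.1 ≠ e.2) →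
    (L.foldl (fun acc e => acc.bind (fun cs => bpbAddEdge cs e)) (some cs)).isSome →
    bpbUP (bpbE (E0 ++ L)) := by
  intro L
  induction L with
  | nil => intro cs E0 hP hU _ _; simpa using hU
  | cons eh L ih =>
    intro cs E0 hP hU hne hS
    rw [List.foldl_cons] at hS
    cases hAdd : ((some cs).bind (fun cs => bpbAddEdge cs eh)) with
    | none => rw [hAdd, bpb_fold_none] at hS; simp at hS
    | some cs' =>
      have hAdd' : bpbAddEdge cs eh = some cs' := by simpa using hAdd
      obtain ⟨hP', hnb⟩ := bpbAddEdge_partOK hP hAdd'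
      have hnr : ¬ bpbReach (bpbE E0) eh.1 eh.2 := by
        intro hr
        rcases bpb_comp_reach hP hr with heq | ⟨c, hc, h1, h2⟩
        · exact hne eh List.mem_cons_self heq
        · exact hnb ⟨c, hc, h1, h2⟩
      have hU' := bpbUP_ext hU hnr
      have := ih cs' (E0 ++ [eh]) hP' hU' (fun e he => hne e (List.mem_cons_of_mem _ he))
        (by rw [hAdd] at hS; exact hS)
      simpa using this

lemma bpbInc_mem {block_id : List (Int × Int)} {adj : List (Int × List (Int × Int))}
    {e : BpbV × BpbV} : e ∈ bpbInc block_id adj ↔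
      ∃ p ∈ adj, ∃ q ∈ p.2, ∃ b, (PySem.Dict.mk block_id).get? q.2 = some b ∧
        (e = ((("n", p.1) : BpbV), (("b", b) : BpbV)) ∨ e = ((("n", q.1) : BpbV), (("b", b) : BpbV))) := by
  simp only [bpbInc, List.mem_flatMap]
  constructor
  · rintro ⟨p, hp, q, hq, he⟩
    cases hb : (PySem.Dict.mk block_id).get? q.2 with
    | none => rw [hb] at he; simp at he
    | some b =>
      rw [hb] at he
      simp only [List.mem_cons, List.not_mem_nil, or_false] at he
      exact ⟨p, hp, q, hq, b, hb, he⟩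
  · rintro ⟨p, hp, q, hq, b, hb, he⟩
    refine ⟨p, hp, q, hq, ?_⟩
    rw [hb]
    simpa using he

lemma bpb_inc_ne {block_id : List (Int × Int)} {adj : List (Int × List (Int × Int))}
    {e : BpbV × BpbV} (he : e ∈ bpbInc block_id adj) : e.1 ≠ e.2 ∧ e.1.1 = "n" ∧ e.2.1 = "b" := by
  obtain ⟨p, _, q, _, b, _, he⟩ := bpbInc_mem.1 he
  rcases he with rfl | rfl <;> exact ⟨by simp, rfl, rfl⟩

lemma bpbUP_empty : bpbUP (bpbE ([] : List (BpbV × BpbV))) := by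
  have hsing : ∀ (r : List BpbV) (a b : BpbV), bpbIsPath (bpbE []) r a b → r = [a] := by
    rintro r a b ⟨⟨hc, hh, hl⟩, -⟩
    cases r with
    | nil => simp at hh
    | cons x t =>
      obtain rfl : a = x := by symm; simpa using hh
      cases t with
      | nil => rfl
      | cons y t' =>
        obtain ⟨⟨e, he, -⟩, -⟩ := List.isChain_cons_cons.1 hc
        simp at he
  intro a b p q hp hq
  rw [hsing p a b hp, hsing q a b hq]

lemma bpbUP_congr {R R' : BpbV → BpbV → Prop} (h : ∀ x y, R x y ↔ R' x y) (hU : bpbUP R) :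
    bpbUP R' := by
  intro a b p q hp hq
  exact hU a b p q
    ⟨⟨hp.1.1.imp (fun x y hxy => (h x y).2 hxy), hp.1.2.1, hp.1.2.2⟩, hp.2⟩
    ⟨⟨hq.1.1.imp (fun x y hxy => (h x y).2 hxy), hq.1.2.1, hq.1.2.2⟩, hq.2⟩

lemma bpbE_dedup {E : List (BpbV × BpbV)} {x y : BpbV} :
    bpbE (PySem.List.dedup E) x y ↔ bpbE E x y := by
  constructor <;> rintro ⟨e, he, hor⟩
  · exact ⟨e, (PySem.List.mem_dedup _ _).1 he, hor⟩
  · exact ⟨e, (PySem.List.mem_dedup _ _).2 he, hor⟩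

lemma bpbUP_of_acyclic {block_id : List (Int × Int)} {adj : List (Int × List (Int × Int))}
    (h : bpbAcyclic block_id adj = true) : bpbUP (bpbE (bpbInc block_id adj)) := by
  have h0 : bpbPartOK [] [] := ⟨List.Pairwise.nil, by simp⟩
  have hne : ∀ e ∈ PySem.List.dedup (bpbInc block_id adj), e.1 ≠ e.2 :=
    fun e he => (bpb_inc_ne ((PySem.List.mem_dedup _ _).1 he)).1
  have hS : ((PySem.List.dedup (bpbInc block_id adj)).foldl
      (fun acc e => acc.bind (fun cs => bpbAddEdge cs e)) (some [])).isSome := h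
  have := bpb_uf_fold (PySem.List.dedup (bpbInc block_id adj)) [] [] h0 bpbUP_empty hne hS
  exact bpbUP_congr (fun x y => bpbE_dedup) (by simpa using this)

-- ---- characterisation of the two trees: same adjacency relation ----

-- a node n and a block b are incident
def bpbIncNB (block_id : List (Int × Int)) (adj : List (Int × List (Int × Int))) (n b : Int) : Prop :=
  ∃ p ∈ adj, ∃ q ∈ p.2, (PySem.Dict.mk block_id).get? q.2 = some b ∧ (n = p.1 ∨ n = q.1)

lemma bpbE_inc_iff {block_id : List (Int × Int)} {adj : List (Int × List (Int × Int))} {x y : BpbV} :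
    bpbE (bpbInc block_id adj) x y ↔
      ∃ n b, bpbIncNB block_id adj n b ∧
        ((x = ("n", n) ∧ y = ("b", b)) ∨ (x = ("b", b) ∧ y = ("n", n))) := by
  constructor
  · rintro ⟨e, he, hor⟩
    obtain ⟨p, hp, q, hq, b, hb, he⟩ := bpbInc_mem.1 he
    rcases he with rfl | rfl
    · exact ⟨p.1, b, ⟨p, hp, q, hq, hb, Or.inl rfl⟩, by simpa using hor⟩
    · exact ⟨q.1, b, ⟨p, hp, q, hq, hb, Or.inr rfl⟩, by simpa using hor⟩
  · rintro ⟨n, b, ⟨p, hp, q, hq, hb, hn⟩, hor⟩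
    rcases hn with rfl | rfl
    · exact ⟨((("n", p.1) : BpbV), (("b", b) : BpbV)),
        bpbInc_mem.2 ⟨p, hp, q, hq, b, hb, Or.inl rfl⟩, by simpa using hor⟩
    · exact ⟨((("n", q.1) : BpbV), (("b", b) : BpbV)),
        bpbInc_mem.2 ⟨p, hp, q, hq, b, hb, Or.inr rfl⟩, by simpa using hor⟩

lemma bpbSetAdd_ne_nil {α : Type} [BEq α] {s : PySem.Set α} {x : α} :
    PySem.Set.add s x ≠ [] := by
  cases hs : s with
  | nil => simp [PySem.Set.add]
  | cons a t =>
    unfold PySem.Set.add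
    split <;> simp

-- keys of a modify stay Nodup
lemma bpbNodupKeys_modify {κ ν : Type} [BEq κ] [LawfulBEq κ] (d : PySem.Dict κ ν)
    (k : κ) (d0 : ν) (f : ν → ν) (h : d.keys.Nodup) : (d.modify k d0 f).keys.Nodup := by
  rw [PySem.Dict.keys_modify]
  exact PySem.Dict.nodup_keys_insert _ _ _ h

-- membership characterisation of one inner fold of bpbBlockNodesA
lemma bpbBNinner (block_id : List (Int × Int)) (p : Int × List (Int × Int)) :
    ∀ (Q : List (Int × Int)) (d : PySem.Dict Int (PySem.Set Int)),
      d.keys.Nodup → (∀ b, d.contains b = true → d.getD b PySem.Set.empty ≠ []) →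
      (∀ n b, n ∈ (Q.foldl (fun bn q =>
          match (PySem.Dict.mk block_id).get? q.2 with
          | none => bn
          | some b => bn.modify b PySem.Set.empty (fun s => PySem.Set.add (PySem.Set.add s p.1) q.1)) d).getD b PySem.Set.empty ↔
        n ∈ d.getD b PySem.Set.empty ∨ ∃ q ∈ Q, (PySem.Dict.mk block_id).get? q.2 = some b ∧ (n = p.1 ∨ n = q.1)) ∧
      (Q.foldl (fun bn q =>
          match (PySem.Dict.mk block_id).get? q.2 with
          | none => bn
          | some b => bn.modify b PySem.Set.empty (fun s => PySem.Set.add (PySem.Set.add s p.1) q.1)) d).keys.Nodup ∧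
      (∀ b, (Q.foldl (fun bn q =>
          match (PySem.Dict.mk block_id).get? q.2 with
          | none => bn
          | some b => bn.modify b PySem.Set.empty (fun s => PySem.Set.add (PySem.Set.add s p.1) q.1)) d).contains b = true →
        (Q.foldl (fun bn q =>
          match (PySem.Dict.mk block_id).get? q.2 with
          | none => bn
          | some b => bn.modify b PySem.Set.empty (fun s => PySem.Set.add (PySem.Set.add s p.1) q.1)) d).getD b PySem.Set.empty ≠ []) := by
  intro Q
  induction Q with
  | nil => intro d hk hne; exact ⟨by simp, hk, hne⟩
  | cons q Q ih =>
    intro d hk hne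
    cases hb : (PySem.Dict.mk block_id).get? q.2 with
    | none =>
      obtain ⟨ih1, ih2, ih3⟩ := ih d hk hne
      rw [List.foldl_cons]
      refine ⟨?_, by simp only [hb]; exact ih2, by simp only [hb]; exact ih3⟩
      intro n b
      simp only [hb]
      rw [ih1 n b]
      constructor
      · rintro (h | h)
        · exact Or.inl h
        · exact Or.inr (by obtain ⟨q', hq', h⟩ := h; exact ⟨q', List.mem_cons_of_mem _ hq', h⟩)
      · rintro (h | ⟨q', hq', hg, ho⟩)
        · exact Or.inl h
        · rcases List.mem_cons.1 hq' with rfl | hq'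
          · rw [hb] at hg; simp at hg
          · exact Or.inr ⟨q', hq', hg, ho⟩
    | some b0 =>
      have hk1 := bpbNodupKeys_modify d b0 PySem.Set.empty
        (fun s => PySem.Set.add (PySem.Set.add s p.1) q.1) hk
      have hne1 : ∀ b, (d.modify b0 PySem.Set.empty
          (fun s => PySem.Set.add (PySem.Set.add s p.1) q.1)).contains b = true →
          (d.modify b0 PySem.Set.empty
          (fun s => PySem.Set.add (PySem.Set.add s p.1) q.1)).getD b PySem.Set.empty ≠ [] := by
        intro b hcb
        rw [PySem.Dict.getD_modify]
        split
        · exact bpbSetAdd_ne_nil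
        · next hbne =>
          refine hne b ?_
          rw [PySem.Dict.contains_modify] at hcb
          simpa [hbne] using hcb
      obtain ⟨ih1, ih2, ih3⟩ := ih (d.modify b0 PySem.Set.empty
          (fun s => PySem.Set.add (PySem.Set.add s p.1) q.1)) hk1 hne1
      rw [List.foldl_cons]
      refine ⟨?_, by simp only [hb]; exact ih2, by simp only [hb]; exact ih3⟩
      intro n b
      simp only [hb]
      rw [ih1 n b, PySem.Dict.getD_modify]
      by_cases hbb : b = b0
      · rw [if_pos hbb, hbb]
        simp only [PySem.Set.mem_add]
        constructor
        · rintro (((h | h) | h) | ⟨q', hq', hg, ho⟩)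
          · exact Or.inl h
          · exact Or.inr ⟨q, List.mem_cons_self, hb, Or.inl h⟩
          · exact Or.inr ⟨q, List.mem_cons_self, hb, Or.inr h⟩
          · exact Or.inr ⟨q', List.mem_cons_of_mem _ hq', hg, ho⟩
        · rintro (h | ⟨q', hq', hg, ho⟩)
          · exact Or.inl (Or.inl (Or.inl h))
          · rcases List.mem_cons.1 hq' with rfl | hq'
            · rcases ho with rfl | rfl
              · exact Or.inl (Or.inl (Or.inr rfl))
              · exact Or.inl (Or.inr rfl)
            · exact Or.inr ⟨q', hq', hg, ho⟩
      · rw [if_neg hbb]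
        constructor
        · rintro (h | ⟨q', hq', hg, ho⟩)
          · exact Or.inl h
          · exact Or.inr ⟨q', List.mem_cons_of_mem _ hq', hg, ho⟩
        · rintro (h | ⟨q', hq', hg, ho⟩)
          · exact Or.inl h
          · rcases List.mem_cons.1 hq' with rfl | hq'
            · rw [hb] at hg
              exact absurd (by simpa using hg.symm) hbb
            · exact Or.inr ⟨q', hq', hg, ho⟩

lemma bpbBNouter (block_id : List (Int × Int)) :
    ∀ (L : List (Int × List (Int × Int))) (d : PySem.Dict Int (PySem.Set Int)),
      d.keys.Nodup → (∀ b, d.contains b = true → d.getD b PySem.Set.empty ≠ []) →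
      (∀ n b, n ∈ (L.foldl (fun bn p =>
          p.2.foldl (fun bn q =>
            match (PySem.Dict.mk block_id).get? q.2 with
            | none => bn
            | some b => bn.modify b PySem.Set.empty (fun s => PySem.Set.add (PySem.Set.add s p.1) q.1)) bn) d).getD b PySem.Set.empty ↔
        n ∈ d.getD b PySem.Set.empty ∨ ∃ p ∈ L, ∃ q ∈ p.2, (PySem.Dict.mk block_id).get? q.2 = some b ∧ (n = p.1 ∨ n = q.1)) ∧
      (L.foldl (fun bn p =>
          p.2.foldl (fun bn q =>
            match (PySem.Dict.mk block_id).get? q.2 with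
            | none => bn
            | some b => bn.modify b PySem.Set.empty (fun s => PySem.Set.add (PySem.Set.add s p.1) q.1)) bn) d).keys.Nodup ∧
      (∀ b, (L.foldl (fun bn p =>
          p.2.foldl (fun bn q =>
            match (PySem.Dict.mk block_id).get? q.2 with
            | none => bn
            | some b => bn.modify b PySem.Set.empty (fun s => PySem.Set.add (PySem.Set.add s p.1) q.1)) bn) d).contains b = true →
        (L.foldl (fun bn p =>
          p.2.foldl (fun bn q =>
            match (PySem.Dict.mk block_id).get? q.2 with
            | none => bn
            | some b => bn.modify b PySem.Set.empty (fun s => PySem.Set.add (PySem.Set.add s p.1) q.1)) bn) d).getD b PySem.Set.empty ≠ []) := by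
  intro L
  induction L with
  | nil => intro d hk hne; exact ⟨by simp, hk, hne⟩
  | cons p L ih =>
    intro d hk hne
    obtain ⟨st1, st2, st3⟩ := bpbBNinner block_id p p.2 d hk hne
    obtain ⟨ih1, ih2, ih3⟩ := ih _ st2 st3
    rw [List.foldl_cons]
    refine ⟨?_, ih2, ih3⟩
    intro n b
    rw [ih1 n b, st1 n b]
    constructor
    · rintro ((h | ⟨q, hq, hg, ho⟩) | ⟨p', hp', rest⟩)
      · exact Or.inl h
      · exact Or.inr ⟨p, List.mem_cons_self, q, hq, hg, ho⟩
      · exact Or.inr ⟨p', List.mem_cons_of_mem _ hp', rest⟩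
    · rintro (h | ⟨p', hp', q, hq, hg, ho⟩)
      · exact Or.inl (Or.inl h)
      · rcases List.mem_cons.1 hp' with rfl | hp'
        · exact Or.inl (Or.inr ⟨q, hq, hg, ho⟩)
        · exact Or.inr ⟨p', hp', q, hq, hg, ho⟩

lemma bpbBN_char {block_id : List (Int × Int)} {adj : List (Int × List (Int × Int))} :
    (∀ n b, n ∈ (bpbBlockNodesA block_id adj).getD b PySem.Set.empty ↔ bpbIncNB block_id adj n b) ∧
    (bpbBlockNodesA block_id adj).keys.Nodup ∧
    (∀ b, (bpbBlockNodesA block_id adj).contains b = true →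
      (bpbBlockNodesA block_id adj).getD b PySem.Set.empty ≠ []) := by
  obtain ⟨h1, h2, h3⟩ := bpbBNouter block_id adj PySem.Dict.empty
    (by simpa using PySem.Dict.nodup_keys_empty (κ := Int) (ν := PySem.Set Int))
    (by intro b hb; rw [PySem.Dict.contains_empty] at hb; exact absurd hb (by simp))
  refine ⟨?_, h2, h3⟩
  intro n b
  rw [bpbBlockNodesA, h1 n b]
  simp only [PySem.Dict.getD_empty]
  constructor
  · rintro (h | h)
    · simp at h
    · exact h
  · exact fun h => Or.inr h

lemma bpbNBinner (b0 : Int) :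
    ∀ (ns : List Int) (d : PySem.Dict Int (PySem.Set Int)),
      d.keys.Nodup → (∀ m, d.contains m = true → d.getD m PySem.Set.empty ≠ []) →
      (∀ b m, b ∈ (ns.foldl (fun nb n => nb.modify n PySem.Set.empty (fun s => PySem.Set.add s b0)) d).getD m PySem.Set.empty ↔
          b ∈ d.getD m PySem.Set.empty ∨ (m ∈ ns ∧ b = b0)) ∧
      (ns.foldl (fun nb n => nb.modify n PySem.Set.empty (fun s => PySem.Set.add s b0)) d).keys.Nodup ∧
      (∀ m, (ns.foldl (fun nb n => nb.modify n PySem.Set.empty (fun s => PySem.Set.add s b0)) d).contains m = true →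
        (ns.foldl (fun nb n => nb.modify n PySem.Set.empty (fun s => PySem.Set.add s b0)) d).getD m PySem.Set.empty ≠ []) := by
  intro ns
  induction ns with
  | nil => intro d hk hne; exact ⟨by simp, hk, hne⟩
  | cons n ns ih =>
    intro d hk hne
    have hk1 := bpbNodupKeys_modify d n PySem.Set.empty (fun s => PySem.Set.add s b0) hk
    have hne1 : ∀ m, (d.modify n PySem.Set.empty (fun s => PySem.Set.add s b0)).contains m = true →
        (d.modify n PySem.Set.empty (fun s => PySem.Set.add s b0)).getD m PySem.Set.empty ≠ [] := by
      intro m hcm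
      rw [PySem.Dict.getD_modify]
      split
      · exact bpbSetAdd_ne_nil
      · next hmn =>
        refine hne m ?_
        rw [PySem.Dict.contains_modify] at hcm
        simpa [hmn] using hcm
    obtain ⟨ih1, ih2, ih3⟩ := ih _ hk1 hne1
    rw [List.foldl_cons]
    refine ⟨?_, ih2, ih3⟩
    intro b m
    rw [ih1 b m, PySem.Dict.getD_modify]
    by_cases hmn : m = n
    · rw [if_pos hmn, hmn]
      simp only [PySem.Set.mem_add]
      constructor
      · rintro ((h | h) | ⟨hm, hb⟩)
        · exact Or.inl h
        · exact Or.inr ⟨List.mem_cons_self, h⟩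
        · exact Or.inr ⟨List.mem_cons_of_mem _ hm, hb⟩
      · rintro (h | ⟨hm, hb⟩)
        · exact Or.inl (Or.inl h)
        · rcases List.mem_cons.1 hm with heq | hm
          · exact Or.inl (Or.inr hb)
          · exact Or.inr ⟨hm, hb⟩
    · rw [if_neg hmn]
      constructor
      · rintro (h | ⟨hm, hb⟩)
        · exact Or.inl h
        · exact Or.inr ⟨List.mem_cons_of_mem _ hm, hb⟩
      · rintro (h | ⟨hm, hb⟩)
        · exact Or.inl h
        · rcases List.mem_cons.1 hm with rfl | hm
          · exact absurd rfl hmn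
          · exact Or.inr ⟨hm, hb⟩

lemma bpbNBouter :
    ∀ (L : List (Int × PySem.Set Int)) (d : PySem.Dict Int (PySem.Set Int)),
      d.keys.Nodup → (∀ m, d.contains m = true → d.getD m PySem.Set.empty ≠ []) →
      (∀ b m, b ∈ (L.foldl (fun nb p =>
            p.2.foldl (fun nb n => nb.modify n PySem.Set.empty (fun s => PySem.Set.add s p.1)) nb) d).getD m PySem.Set.empty ↔
          b ∈ d.getD m PySem.Set.empty ∨ ∃ pr ∈ L, m ∈ pr.2 ∧ b = pr.1) ∧
      (L.foldl (fun nb p =>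
            p.2.foldl (fun nb n => nb.modify n PySem.Set.empty (fun s => PySem.Set.add s p.1)) nb) d).keys.Nodup ∧
      (∀ m, (L.foldl (fun nb p =>
            p.2.foldl (fun nb n => nb.modify n PySem.Set.empty (fun s => PySem.Set.add s p.1)) nb) d).contains m = true →
        (L.foldl (fun nb p =>
            p.2.foldl (fun nb n => nb.modify n PySem.Set.empty (fun s => PySem.Set.add s p.1)) nb) d).getD m PySem.Set.empty ≠ []) := by
  intro L
  induction L with
  | nil => intro d hk hne; exact ⟨by simp, hk, hne⟩
  | cons p L ih =>
    intro d hk hne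
    obtain ⟨st1, st2, st3⟩ := bpbNBinner p.1 p.2 d hk hne
    obtain ⟨ih1, ih2, ih3⟩ := ih _ st2 st3
    rw [List.foldl_cons]
    refine ⟨?_, ih2, ih3⟩
    intro b m
    rw [ih1 b m, st1 b m]
    constructor
    · rintro ((h | ⟨hm, hb⟩) | ⟨p', hp', rest⟩)
      · exact Or.inl h
      · exact Or.inr ⟨p, List.mem_cons_self, hm, hb⟩
      · exact Or.inr ⟨p', List.mem_cons_of_mem _ hp', rest⟩
    · rintro (h | ⟨p', hp', hm, hb⟩)
      · exact Or.inl (Or.inl h)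
      · rcases List.mem_cons.1 hp' with rfl | hp'
        · exact Or.inl (Or.inr ⟨hm, hb⟩)
        · exact Or.inr ⟨p', hp', hm, hb⟩

lemma bpbNB_char {block_id : List (Int × Int)} {adj : List (Int × List (Int × Int))} :
    (∀ n b, b ∈ (bpbNodeBlocksA (bpbBlockNodesA block_id adj)).getD n PySem.Set.empty ↔
      bpbIncNB block_id adj n b) ∧
    (bpbNodeBlocksA (bpbBlockNodesA block_id adj)).keys.Nodup ∧
    (∀ n, (bpbNodeBlocksA (bpbBlockNodesA block_id adj)).contains n = true →
      (bpbNodeBlocksA (bpbBlockNodesA block_id adj)).getD n PySem.Set.empty ≠ []) := by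
  obtain ⟨bn1, bn2, bn3⟩ := bpbBN_char (block_id := block_id) (adj := adj)
  obtain ⟨h1, h2, h3⟩ := bpbNBouter (bpbBlockNodesA block_id adj).items PySem.Dict.empty
    (by simp [PySem.Dict.nodup_keys_empty])
    (by intro m hm; rw [PySem.Dict.contains_empty] at hm; exact absurd hm (by simp))
  refine ⟨?_, h2, h3⟩
  intro n b
  rw [bpbNodeBlocksA, h1 b n]
  simp only [PySem.Dict.getD_empty]
  constructor
  · rintro (h | ⟨⟨k, v⟩, hpr, hm, rfl⟩)
    · simp at h
    · have hget := PySem.Dict.get?_of_mem_items _ hpr bn2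
      have hgd : (bpbBlockNodesA block_id adj).getD b PySem.Set.empty = v :=
        PySem.Dict.getD_of_get?_eq_some _ _ hget
      exact (bn1 n b).1 (by rw [hgd]; exact hm)
  · intro h
    have hmem := (bn1 n b).2 h
    cases hg : (bpbBlockNodesA block_id adj).get? b with
    | none =>
      rw [PySem.Dict.getD_of_get?_eq_none _ _ hg] at hmem
      simp [PySem.Set.empty] at hmem
    | some svals =>
      refine Or.inr ⟨(b, svals), PySem.Dict.mem_items_of_get?_eq_some _ hg, ?_, rfl⟩
      rw [PySem.Dict.getD_of_get?_eq_some _ _ hg] at hmem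
      exact hmem

lemma bpbTreeAStep_mem {t : PySem.Dict BpbV (List BpbV)} {n0 b : Int} {x y : BpbV} :
    y ∈ ((t.modify ("n", n0) [] (· ++ [("b", b)])).modify ("b", b) [] (· ++ [("n", n0)])).getD x [] ↔
      y ∈ t.getD x [] ∨ ((x = ("n", n0) ∧ y = ("b", b)) ∨ (x = ("b", b) ∧ y = ("n", n0))) := by
  rw [PySem.Dict.getD_modify]
  by_cases h2 : x = (("b", b) : BpbV)
  · rw [if_pos h2, PySem.Dict.getD_modify, if_neg (by simp), h2]
    simp only [List.mem_append, List.mem_singleton]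
    constructor
    · rintro (h | h)
      · exact Or.inl h
      · exact Or.inr (Or.inr ⟨trivial, h⟩)
    · rintro (h | (⟨hx, hy⟩ | ⟨hx, hy⟩))
      · exact Or.inl h
      · exact absurd hx (by simp)
      · exact Or.inr hy
  · rw [if_neg h2, PySem.Dict.getD_modify]
    by_cases h1 : x = (("n", n0) : BpbV)
    · rw [if_pos h1, h1]
      simp only [List.mem_append, List.mem_singleton]
      constructor
      · rintro (h | h)
        · exact Or.inl h
        · exact Or.inr (Or.inl ⟨trivial, h⟩)
      · rintro (h | (⟨hx, hy⟩ | ⟨hx, hy⟩))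
        · exact Or.inl h
        · exact Or.inr hy
        · exact absurd hx (by simp)
    · rw [if_neg h1]
      constructor
      · exact Or.inl
      · rintro (h | (⟨hx, hy⟩ | ⟨hx, hy⟩))
        · exact h
        · exact absurd hx h1
        · exact absurd hx h2

lemma bpbTreeAinner (n0 : Int) :
    ∀ (bs : List Int) (t : PySem.Dict BpbV (List BpbV)) (x y : BpbV),
      y ∈ (bs.foldl (fun t b =>
          ((t.modify ("n", n0) [] (· ++ [("b", b)])).modify ("b", b) [] (· ++ [("n", n0)]))) t).getD x [] ↔
        y ∈ t.getD x [] ∨ ∃ b ∈ bs, ((x = ("n", n0) ∧ y = ("b", b)) ∨ (x = ("b", b) ∧ y = ("n", n0))) := by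
  intro bs
  induction bs with
  | nil => intro t x y; simp
  | cons b bs ih =>
    intro t x y
    rw [List.foldl_cons, ih, bpbTreeAStep_mem]
    constructor
    · rintro ((h | h) | ⟨b', hb', h⟩)
      · exact Or.inl h
      · exact Or.inr ⟨b, List.mem_cons_self, h⟩
      · exact Or.inr ⟨b', List.mem_cons_of_mem _ hb', h⟩
    · rintro (h | ⟨b', hb', h⟩)
      · exact Or.inl (Or.inl h)
      · rcases List.mem_cons.1 hb' with rfl | hb'
        · exact Or.inl (Or.inr h)
        · exact Or.inr ⟨b', hb', h⟩

lemma bpbTreeAouter :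
    ∀ (L : List (Int × PySem.Set Int)) (t : PySem.Dict BpbV (List BpbV)) (x y : BpbV),
      y ∈ (L.foldl (fun t p =>
          p.2.foldl (fun t b =>
            ((t.modify ("n", p.1) [] (· ++ [("b", b)])).modify ("b", b) [] (· ++ [("n", p.1)]))) t) t).getD x [] ↔
        y ∈ t.getD x [] ∨ ∃ pr ∈ L, ∃ b ∈ pr.2,
          ((x = ("n", pr.1) ∧ y = ("b", b)) ∨ (x = ("b", b) ∧ y = ("n", pr.1))) := by
  intro L
  induction L with
  | nil => intro t x y; simp
  | cons p L ih =>
    intro t x y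
    rw [List.foldl_cons, ih, bpbTreeAinner]
    constructor
    · rintro ((h | ⟨b, hb, hh⟩) | ⟨pr, hpr, rest⟩)
      · exact Or.inl h
      · exact Or.inr ⟨p, List.mem_cons_self, b, hb, hh⟩
      · exact Or.inr ⟨pr, List.mem_cons_of_mem _ hpr, rest⟩
    · rintro (h | ⟨pr, hpr, b, hb, hh⟩)
      · exact Or.inl (Or.inl h)
      · rcases List.mem_cons.1 hpr with rfl | hpr
        · exact Or.inl (Or.inr ⟨b, hb, hh⟩)
        · exact Or.inr ⟨pr, hpr, b, hb, hh⟩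

lemma bpbTreeA_mem_iff {block_id : List (Int × Int)} {adj : List (Int × List (Int × Int))} {x y : BpbV} :
    y ∈ (bpbTreeA (bpbNodeBlocksA (bpbBlockNodesA block_id adj))).getD x [] ↔
      bpbE (bpbInc block_id adj) x y := by
  obtain ⟨c1, c2, c3⟩ := bpbNB_char (block_id := block_id) (adj := adj)
  rw [bpbTreeA, bpbTreeAouter, bpbE_inc_iff]
  simp only [PySem.Dict.getD_empty]
  constructor
  · rintro (h | ⟨⟨k, v⟩, hpr, b, hb, hh⟩)
    · simp at h
    · have hget := PySem.Dict.get?_of_mem_items _ hpr c2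
      have hgd : (bpbNodeBlocksA (bpbBlockNodesA block_id adj)).getD k PySem.Set.empty = v :=
        PySem.Dict.getD_of_get?_eq_some _ _ hget
      exact ⟨k, b, (c1 k b).1 (by rw [hgd]; exact hb), hh⟩
  · rintro ⟨n, b, hinc, hh⟩
    have hmem := (c1 n b).2 hinc
    cases hg : (bpbNodeBlocksA (bpbBlockNodesA block_id adj)).get? n with
    | none =>
      rw [PySem.Dict.getD_of_get?_eq_none _ _ hg] at hmem
      simp [PySem.Set.empty] at hmem
    | some svals =>
      refine Or.inr ⟨(n, svals), PySem.Dict.mem_items_of_get?_eq_some _ hg, b, ?_, hh⟩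
      rw [PySem.Dict.getD_of_get?_eq_some _ _ hg] at hmem
      exact hmem

lemma bpbTreeBStep_mem {t : PySem.Dict BpbV (PySem.Set BpbV)} {n0 b : Int} {x y : BpbV} :
    y ∈ ((t.modify ("n", n0) PySem.Set.empty (fun s => PySem.Set.add s ("b", b))).modify
        ("b", b) PySem.Set.empty (fun s => PySem.Set.add s ("n", n0))).getD x PySem.Set.empty ↔
      y ∈ t.getD x PySem.Set.empty ∨
        ((x = ("n", n0) ∧ y = ("b", b)) ∨ (x = ("b", b) ∧ y = ("n", n0))) := by
  rw [PySem.Dict.getD_modify]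
  by_cases h2 : x = (("b", b) : BpbV)
  · rw [if_pos h2, PySem.Dict.getD_modify, if_neg (by simp), h2]
    simp only [PySem.Set.mem_add]
    constructor
    · rintro (h | h)
      · exact Or.inl h
      · exact Or.inr (Or.inr ⟨trivial, h⟩)
    · rintro (h | (⟨hx, hy⟩ | ⟨hx, hy⟩))
      · exact Or.inl h
      · exact absurd hx (by simp)
      · exact Or.inr hy
  · rw [if_neg h2, PySem.Dict.getD_modify]
    by_cases h1 : x = (("n", n0) : BpbV)
    · rw [if_pos h1, h1]
      simp only [PySem.Set.mem_add]
      constructor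
      · rintro (h | h)
        · exact Or.inl h
        · exact Or.inr (Or.inl ⟨trivial, h⟩)
      · rintro (h | (⟨hx, hy⟩ | ⟨hx, hy⟩))
        · exact Or.inl h
        · exact Or.inr hy
        · exact absurd hx (by simp)
    · rw [if_neg h1]
      constructor
      · exact Or.inl
      · rintro (h | (⟨hx, hy⟩ | ⟨hx, hy⟩))
        · exact h
        · exact absurd hx h1
        · exact absurd hx h2

lemma bpbTreeBStep_NE {t : PySem.Dict BpbV (PySem.Set BpbV)} {n0 b : Int}
    (hne : ∀ v, t.contains v = true → t.getD v PySem.Set.empty ≠ []) :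
    ∀ v, ((t.modify ("n", n0) PySem.Set.empty (fun s => PySem.Set.add s ("b", b))).modify
        ("b", b) PySem.Set.empty (fun s => PySem.Set.add s ("n", n0))).contains v = true →
      ((t.modify ("n", n0) PySem.Set.empty (fun s => PySem.Set.add s ("b", b))).modify
        ("b", b) PySem.Set.empty (fun s => PySem.Set.add s ("n", n0))).getD v PySem.Set.empty ≠ [] := by
  intro v hc
  rw [PySem.Dict.getD_modify]
  split
  · exact bpbSetAdd_ne_nil
  · next hv2 =>
    rw [PySem.Dict.getD_modify]
    split
    · exact bpbSetAdd_ne_nil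
    · next hv1 =>
      refine hne v ?_
      rw [PySem.Dict.contains_modify, PySem.Dict.contains_modify] at hc
      simpa [hv1, hv2] using hc

lemma bpbTreeBmid (block_id : List (Int × Int)) (p : Int × List (Int × Int)) :
    ∀ (Q : List (Int × Int)) (t : PySem.Dict BpbV (PySem.Set BpbV)),
      (∀ v, t.contains v = true → t.getD v PySem.Set.empty ≠ []) →
      (∀ x y, y ∈ (Q.foldl (fun t q =>
          match (PySem.Dict.mk block_id).get? q.2 with
          | none => t
          | some b =>
            [p.1, q.1].foldl (fun t n =>
              (t.modify ("n", n) PySem.Set.empty (fun s => PySem.Set.add s ("b", b))).modify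
                ("b", b) PySem.Set.empty (fun s => PySem.Set.add s ("n", n))) t) t).getD x PySem.Set.empty ↔
        y ∈ t.getD x PySem.Set.empty ∨ ∃ q ∈ Q, ∃ b, (PySem.Dict.mk block_id).get? q.2 = some b ∧
          ∃ n, (n = p.1 ∨ n = q.1) ∧
            ((x = ("n", n) ∧ y = ("b", b)) ∨ (x = ("b", b) ∧ y = ("n", n)))) ∧
      (∀ v, (Q.foldl (fun t q =>
          match (PySem.Dict.mk block_id).get? q.2 with
          | none => t
          | some b =>
            [p.1, q.1].foldl (fun t n =>
              (t.modify ("n", n) PySem.Set.empty (fun s => PySem.Set.add s ("b", b))).modify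
                ("b", b) PySem.Set.empty (fun s => PySem.Set.add s ("n", n))) t) t).contains v = true →
        (Q.foldl (fun t q =>
          match (PySem.Dict.mk block_id).get? q.2 with
          | none => t
          | some b =>
            [p.1, q.1].foldl (fun t n =>
              (t.modify ("n", n) PySem.Set.empty (fun s => PySem.Set.add s ("b", b))).modify
                ("b", b) PySem.Set.empty (fun s => PySem.Set.add s ("n", n))) t) t).getD v PySem.Set.empty ≠ []) := by
  intro Q
  induction Q with
  | nil => intro t hne; exact ⟨by simp, hne⟩
  | cons q Q ih =>
    intro t hne
    cases hb : (PySem.Dict.mk block_id).get? q.2 with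
    | none =>
      obtain ⟨ih1, ih2⟩ := ih t hne
      rw [List.foldl_cons]
      refine ⟨?_, by simp only [hb]; exact ih2⟩
      intro x y
      simp only [hb]
      rw [ih1 x y]
      constructor
      · rintro (h | ⟨q', hq', rest⟩)
        · exact Or.inl h
        · exact Or.inr ⟨q', List.mem_cons_of_mem _ hq', rest⟩
      · rintro (h | ⟨q', hq', b, hg, rest⟩)
        · exact Or.inl h
        · rcases List.mem_cons.1 hq' with rfl | hq'
          · rw [hb] at hg; simp at hg
          · exact Or.inr ⟨q', hq', b, hg, rest⟩
    | some b0 =>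
      have hstep : ∀ v, (([p.1, q.1].foldl (fun t n =>
          (t.modify ("n", n) PySem.Set.empty (fun s => PySem.Set.add s ("b", b0))).modify
            ("b", b0) PySem.Set.empty (fun s => PySem.Set.add s ("n", n))) t)).contains v = true →
          (([p.1, q.1].foldl (fun t n =>
          (t.modify ("n", n) PySem.Set.empty (fun s => PySem.Set.add s ("b", b0))).modify
            ("b", b0) PySem.Set.empty (fun s => PySem.Set.add s ("n", n))) t)).getD v PySem.Set.empty ≠ [] := by
        simp only [List.foldl_cons, List.foldl_nil]
        exact bpbTreeBStep_NE (bpbTreeBStep_NE hne)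
      obtain ⟨ih1, ih2⟩ := ih _ hstep
      rw [List.foldl_cons]
      refine ⟨?_, by simp only [hb]; exact ih2⟩
      intro x y
      simp only [hb]
      rw [ih1 x y]
      simp only [List.foldl_cons, List.foldl_nil, bpbTreeBStep_mem]
      constructor
      · rintro (((h | h) | h) | ⟨q', hq', rest⟩)
        · exact Or.inl h
        · exact Or.inr ⟨q, List.mem_cons_self, b0, hb, p.1, Or.inl rfl, h⟩
        · exact Or.inr ⟨q, List.mem_cons_self, b0, hb, q.1, Or.inr rfl, h⟩
        · exact Or.inr ⟨q', List.mem_cons_of_mem _ hq', rest⟩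
      · rintro (h | ⟨q', hq', b, hg, n, hn, hxy⟩)
        · exact Or.inl (Or.inl (Or.inl h))
        · rcases List.mem_cons.1 hq' with rfl | hq'
          · rw [hb] at hg
            obtain rfl : b = b0 := by simpa using hg.symm
            rcases hn with rfl | rfl
            · exact Or.inl (Or.inl (Or.inr hxy))
            · exact Or.inl (Or.inr hxy)
          · exact Or.inr ⟨q', hq', b, hg, n, hn, hxy⟩

lemma bpbTreeBouter (block_id : List (Int × Int)) :
    ∀ (L : List (Int × List (Int × Int))) (t : PySem.Dict BpbV (PySem.Set BpbV)),
      (∀ v, t.contains v = true → t.getD v PySem.Set.empty ≠ []) →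
      (∀ x y, y ∈ (L.foldl (fun t p =>
          p.2.foldl (fun t q =>
            match (PySem.Dict.mk block_id).get? q.2 with
            | none => t
            | some b =>
              [p.1, q.1].foldl (fun t n =>
                (t.modify ("n", n) PySem.Set.empty (fun s => PySem.Set.add s ("b", b))).modify
                  ("b", b) PySem.Set.empty (fun s => PySem.Set.add s ("n", n))) t) t) t).getD x PySem.Set.empty ↔
        y ∈ t.getD x PySem.Set.empty ∨ ∃ p ∈ L, ∃ q ∈ p.2, ∃ b,
          (PySem.Dict.mk block_id).get? q.2 = some b ∧ ∃ n, (n = p.1 ∨ n = q.1) ∧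
            ((x = ("n", n) ∧ y = ("b", b)) ∨ (x = ("b", b) ∧ y = ("n", n)))) ∧
      (∀ v, (L.foldl (fun t p =>
          p.2.foldl (fun t q =>
            match (PySem.Dict.mk block_id).get? q.2 with
            | none => t
            | some b =>
              [p.1, q.1].foldl (fun t n =>
                (t.modify ("n", n) PySem.Set.empty (fun s => PySem.Set.add s ("b", b))).modify
                  ("b", b) PySem.Set.empty (fun s => PySem.Set.add s ("n", n))) t) t) t).contains v = true →
        (L.foldl (fun t p =>
          p.2.foldl (fun t q =>
            match (PySem.Dict.mk block_id).get? q.2 with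
            | none => t
            | some b =>
              [p.1, q.1].foldl (fun t n =>
                (t.modify ("n", n) PySem.Set.empty (fun s => PySem.Set.add s ("b", b))).modify
                  ("b", b) PySem.Set.empty (fun s => PySem.Set.add s ("n", n))) t) t) t).getD v PySem.Set.empty ≠ []) := by
  intro L
  induction L with
  | nil => intro t hne; exact ⟨by simp, hne⟩
  | cons p L ih =>
    intro t hne
    obtain ⟨st1, st2⟩ := bpbTreeBmid block_id p p.2 t hne
    obtain ⟨ih1, ih2⟩ := ih _ st2
    rw [List.foldl_cons]
    refine ⟨?_, ih2⟩
    intro x y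
    rw [ih1 x y, st1 x y]
    constructor
    · rintro ((h | ⟨q, hq, rest⟩) | ⟨p', hp', rest⟩)
      · exact Or.inl h
      · exact Or.inr ⟨p, List.mem_cons_self, q, hq, rest⟩
      · exact Or.inr ⟨p', List.mem_cons_of_mem _ hp', rest⟩
    · rintro (h | ⟨p', hp', q, hq, rest⟩)
      · exact Or.inl (Or.inl h)
      · rcases List.mem_cons.1 hp' with rfl | hp'
        · exact Or.inl (Or.inr ⟨q, hq, rest⟩)
        · exact Or.inr ⟨p', hp', q, hq, rest⟩

lemma bpbTreeB_mem_iff {block_id : List (Int × Int)} {adj : List (Int × List (Int × Int))} {x y : BpbV} :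
    y ∈ (bpbTreeB block_id adj).getD x PySem.Set.empty ↔ bpbE (bpbInc block_id adj) x y := by
  obtain ⟨h1, h2⟩ := bpbTreeBouter block_id adj PySem.Dict.empty
    (by intro v hv; rw [PySem.Dict.contains_empty] at hv; exact absurd hv (by simp))
  rw [bpbTreeB, h1 x y, bpbE_inc_iff]
  simp only [PySem.Dict.getD_empty]
  constructor
  · rintro (h | ⟨p, hp, q, hq, b, hg, n, hn, hxy⟩)
    · simp at h
    · exact ⟨n, b, ⟨p, hp, q, hq, hg, hn⟩, hxy⟩
  · rintro ⟨n, b, ⟨p, hp, q, hq, hg, hn⟩, hxy⟩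
    exact Or.inr ⟨p, hp, q, hq, b, hg, n, hn, hxy⟩

lemma bpbTreeB_NE {block_id : List (Int × Int)} {adj : List (Int × List (Int × Int))} :
    ∀ v, (bpbTreeB block_id adj).contains v = true →
      (bpbTreeB block_id adj).getD v PySem.Set.empty ≠ [] := by
  obtain ⟨h1, h2⟩ := bpbTreeBouter block_id adj PySem.Dict.empty
    (by intro v hv; rw [PySem.Dict.contains_empty] at hv; exact absurd hv (by simp))
  exact h2

lemma bpbGuardA_iff {block_id : List (Int × Int)} {adj : List (Int × List (Int × Int))} {n : Int} :
    (bpbNodeBlocksA (bpbBlockNodesA block_id adj)).contains n = true ↔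
      ∃ b, bpbIncNB block_id adj n b := by
  obtain ⟨c1, c2, c3⟩ := bpbNB_char (block_id := block_id) (adj := adj)
  constructor
  · intro h
    obtain ⟨b, hb⟩ := List.exists_mem_of_ne_nil _ (c3 n h)
    exact ⟨b, (c1 n b).1 hb⟩
  · rintro ⟨b, hb⟩
    by_contra hc
    have hgd := PySem.Dict.getD_of_not_contains
      (bpbNodeBlocksA (bpbBlockNodesA block_id adj)) (k := n) PySem.Set.empty (by simpa using hc)
    have := (c1 n b).2 hb
    rw [hgd] at this
    simp [PySem.Set.empty] at this

lemma bpbGuardB_iff {block_id : List (Int × Int)} {adj : List (Int × List (Int × Int))} {n : Int} :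
    (bpbTreeB block_id adj).contains ("n", n) = true ↔ ∃ b, bpbIncNB block_id adj n b := by
  constructor
  · intro h
    obtain ⟨y, hy⟩ := List.exists_mem_of_ne_nil _ (bpbTreeB_NE _ h)
    obtain ⟨n', b, hinc, hxy⟩ := bpbE_inc_iff.1 (bpbTreeB_mem_iff.1 hy)
    rcases hxy with ⟨hx, -⟩ | ⟨hx, -⟩
    · obtain rfl : n = n' := by simpa using congrArg Prod.snd hx
      exact ⟨b, hinc⟩
    · exact absurd (congrArg Prod.fst hx) (by simp)
  · rintro ⟨b, hb⟩
    have hmem : (("b", b) : BpbV) ∈ (bpbTreeB block_id adj).getD ("n", n) PySem.Set.empty :=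
      bpbTreeB_mem_iff.2 (bpbE_inc_iff.2 ⟨n, b, hb, Or.inl ⟨rfl, rfl⟩⟩)
    by_contra hc
    rw [PySem.Dict.getD_of_not_contains _ _ (by simpa using hc)] at hmem
    simp [PySem.Set.empty] at hmem

lemma bpbHead_mem_iff {block_id : List (Int × Int)} {adj : List (Int × List (Int × Int))} {n : Int} :
    (("n", n) : BpbV) ∈ (bpbInc block_id adj).map (·.1) ↔ ∃ b, bpbIncNB block_id adj n b := by
  rw [List.mem_map]
  constructor
  · rintro ⟨e, he, h1⟩
    obtain ⟨p, hp, q, hq, b, hb, hcase⟩ := bpbInc_mem.1 he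
    rcases hcase with rfl | rfl
    · obtain rfl : n = p.1 := by simpa using h1.symm
      exact ⟨b, p, hp, q, hq, hb, Or.inl rfl⟩
    · obtain rfl : n = q.1 := by simpa using h1.symm
      exact ⟨b, p, hp, q, hq, hb, Or.inr rfl⟩
  · rintro ⟨b, p, hp, q, hq, hb, hn⟩
    rcases hn with rfl | rfl
    · exact ⟨((("n", p.1) : BpbV), (("b", b) : BpbV)),
        bpbInc_mem.2 ⟨p, hp, q, hq, b, hb, Or.inl rfl⟩, rfl⟩
    · exact ⟨((("n", q.1) : BpbV), (("b", b) : BpbV)),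
        bpbInc_mem.2 ⟨p, hp, q, hq, b, hb, Or.inr rfl⟩, rfl⟩

-- ---- A's BFS produces the (unique) path; completeness on failure ----

-- (stated over an abstract relation R agreeing with the tree's adjacency)

def bpbInvA (R : BpbV → BpbV → Prop) (src : BpbV) (parent : PySem.Dict BpbV (Option BpbV))
    (q : List BpbV) : Prop :=
  parent.keys = q ∧ q.Nodup ∧ q.head? = some src ∧ parent.get? src = some none ∧
  ∀ v ∈ q, v ≠ src → ∃ u ∈ q, parent.get? v = some (some u) ∧ R u v ∧ q.idxOf u < q.idxOf v

-- all neighbours of already-expanded vertices are already discovered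
def bpbExpA (tree : PySem.Dict BpbV (List BpbV)) (parent : PySem.Dict BpbV (Option BpbV))
    (done : List BpbV) : Prop :=
  ∀ w ∈ done, ∀ v ∈ tree.getD w [], (parent.get? v).isSome = true

def bpbBndA (tree : PySem.Dict BpbV (List BpbV)) (src : BpbV) (q : List BpbV) : Prop :=
  ∀ v ∈ q, v = src ∨ v ∈ tree.values.flatten

-- every adjacency list is contained in the flattened value pool
lemma bpb_getD_sub (tree : PySem.Dict BpbV (List BpbV)) (u : BpbV) :
    tree.getD u [] ⊆ tree.values.flatten := by
  cases h : tree.get? u with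
  | none => simp [PySem.Dict.getD_of_get?_eq_none _ _ h]
  | some l =>
    have hl : l ∈ tree.values := by
      have := PySem.Dict.mem_items_of_get?_eq_some _ h
      exact List.mem_map_of_mem this
    rw [PySem.Dict.getD_of_get?_eq_some _ _ h]
    intro x hx
    exact List.mem_flatten.2 ⟨l, hl, hx⟩

lemma bpb_len_le (tree : PySem.Dict BpbV (List BpbV)) (src : BpbV) (q : List BpbV)
    (hn : q.Nodup) (hb : bpbBndA tree src q) : q.length ≤ tree.values.flatten.length + 1 := by
  have hs : q ⊆ src :: tree.values.flatten := by
    intro v hv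
    rcases hb v hv with h | h
    · simp [h]
    · exact List.mem_cons_of_mem _ h
  simpa using (List.Nodup.subperm hn hs).length_le

-- one neighbour-list fold of A's BFS (parent dict + queue)
lemma bpbFoldA (u : BpbV) :
    ∀ (L : List BpbV) (parent : PySem.Dict BpbV (Option BpbV)) (q : List BpbV),
      parent.keys = q →
      ∃ new,
        (L.foldl (fun st v => if (st.1.get? v).isSome then st else (st.1.insert v (some u), st.2 ++ [v])) (parent, q)).2 = q ++ new ∧
        (L.foldl (fun st v => if (st.1.get? v).isSome then st else (st.1.insert v (some u), st.2 ++ [v])) (parent, q)).1.keys = q ++ new ∧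
        (∀ k, (L.foldl (fun st v => if (st.1.get? v).isSome then st else (st.1.insert v (some u), st.2 ++ [v])) (parent, q)).1.get? k = if k ∈ new then some (some u) else parent.get? k) ∧
        new.Nodup ∧ (∀ v ∈ new, v ∉ q ∧ v ∈ L) ∧ (∀ v ∈ L, v ∈ q ++ new) := by
  intro L
  induction L with
  | nil =>
    intro parent q hk
    exact ⟨[], by simp, by simpa using hk, by intro k; simp, by simp, by simp, by simp⟩
  | cons v L ih =>
    intro parent q hk
    by_cases hv : v ∈ q
    · have hsome : (parent.get? v).isSome = true := by
        have hc : parent.contains v = true := (PySem.Dict.contains_iff_mem_keys _ _).2 (by rw [hk]; exact hv)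
        rwa [PySem.Dict.contains_eq_isSome_get?] at hc
      obtain ⟨new, h1, h3, h4, h5, h6, h7⟩ := ih parent q hk
      refine ⟨new, ?_, ?_, ?_, h5, ?_, ?_⟩
      · simpa [hsome] using h1
      · simpa [hsome] using h3
      · intro k; simpa [hsome] using h4 k
      · intro x hx
        exact ⟨(h6 x hx).1, List.mem_cons_of_mem _ (h6 x hx).2⟩
      · intro x hx
        rcases List.mem_cons.1 hx with rfl | h
        · exact List.mem_append_left _ hv
        · exact h7 x h
    · have hnone : parent.get? v = none := by
        rw [PySem.Dict.get?_eq_none_iff_not_mem_keys, hk]; exact hv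
      have hcf : parent.contains v = false := by
        rw [PySem.Dict.contains_eq_isSome_get?, hnone]; rfl
      have hk' : (parent.insert v (some u)).keys = q ++ [v] := by
        rw [PySem.Dict.keys_insert_of_not_contains _ _ hcf, hk]
      obtain ⟨new, h1, h3, h4, h5, h6, h7⟩ := ih (parent.insert v (some u)) (q ++ [v]) hk'
      have hvnew : v ∉ new := fun hx => (h6 v hx).1 (by simp)
      refine ⟨v :: new, ?_, ?_, ?_, ?_, ?_, ?_⟩
      · simpa [hnone] using h1
      · simpa [hnone] using h3
      · intro k
        have := h4 k
        simp only [List.foldl_cons, hnone, Option.isSome_none, Bool.false_eq_true, if_false] at this ⊢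
        rw [this]
        by_cases hk1 : k ∈ new
        · simp [hk1]
        · by_cases hk2 : k = v
          · simp [hk2]
          · simp [hk1, hk2, PySem.Dict.get?_insert]
      · exact List.nodup_cons.2 ⟨hvnew, h5⟩
      · intro x hx
        rcases List.mem_cons.1 hx with rfl | h
        · exact ⟨hv, List.mem_cons_self⟩
        · have := h6 x h
          refine ⟨fun hq => this.1 (List.mem_append_left _ hq), List.mem_cons_of_mem _ this.2⟩
      · intro x hx
        rcases List.mem_cons.1 hx with rfl | h
        · simp
        · have := h7 x h
          simpa [List.append_assoc] using this

lemma bpbStepA_inv (tree : PySem.Dict BpbV (List BpbV)) (R : BpbV → BpbV → Prop)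
    (hAdj : ∀ x y, y ∈ tree.getD x [] ↔ R x y) (src u : BpbV)
    (parent : PySem.Dict BpbV (Option BpbV)) (done rest : List BpbV)
    (hInv : bpbInvA R src parent (done ++ u :: rest))
    (hExp : bpbExpA tree parent done)
    (hBnd : bpbBndA tree src (done ++ u :: rest)) :
    ∃ new,
      (bpbStepA tree u (parent, done ++ u :: rest)).2 = (done ++ u :: rest) ++ new ∧
      bpbInvA R src (bpbStepA tree u (parent, done ++ u :: rest)).1 ((done ++ u :: rest) ++ new) ∧
      bpbExpA tree (bpbStepA tree u (parent, done ++ u :: rest)).1 (done ++ [u]) ∧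
      bpbBndA tree src ((done ++ u :: rest) ++ new) := by
  obtain ⟨hkeys, hnodup, hhead, hsrcget, hmain⟩ := hInv
  obtain ⟨new, h1, h3, h4, h5, h6, h7⟩ :=
    bpbFoldA u (tree.getD u []) parent (done ++ u :: rest) hkeys
  have hsrcq : src ∈ done ++ u :: rest := by
    cases hq : done ++ u :: rest with
    | nil => simp [hq] at hhead
    | cons a t =>
      rw [hq] at hhead
      simp only [List.head?_cons, Option.some.injEq] at hhead
      rw [← hhead]
      exact List.mem_cons_self
  have huq : u ∈ done ++ u :: rest := List.mem_append_right _ (List.mem_cons_self)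
  have hidx1 : ∀ x, x ∈ done ++ u :: rest →
      List.idxOf x ((done ++ u :: rest) ++ new) = List.idxOf x (done ++ u :: rest) := by
    intro x hx; rw [List.idxOf_append, if_pos hx]
  have hidx2 : ∀ x, x ∉ done ++ u :: rest →
      List.idxOf x ((done ++ u :: rest) ++ new) = List.idxOf x new + (done ++ u :: rest).length := by
    intro x hx; rw [List.idxOf_append, if_neg hx]
  simp only [bpbStepA]
  refine ⟨new, h1, ⟨h3, ?_, ?_, ?_, ?_⟩, ?_, ?_⟩
  · exact List.Nodup.append hnodup h5 (by intro a ha hb; exact (h6 a hb).1 ha)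
  · rw [List.head?_append, hhead]; rfl
  · rw [h4 src]
    have hsn : src ∉ new := fun h => (h6 _ h).1 hsrcq
    simp [hsn, hsrcget]
  · intro v hv hne
    rcases List.mem_append.1 hv with hvq | hvnew
    · obtain ⟨w, hwq, hg, hR, hidx⟩ := hmain v hvq hne
      have hvnotnew : v ∉ new := fun h => (h6 _ h).1 hvq
      refine ⟨w, List.mem_append_left _ hwq, ?_, hR, ?_⟩
      · rw [h4 v]; simp [hvnotnew, hg]
      · rw [show done ++ u :: rest ++ new = (done ++ u :: rest) ++ new by simp,
          hidx1 w hwq, hidx1 v hvq]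
        exact hidx
    · have hvnq : v ∉ done ++ u :: rest := (h6 _ hvnew).1
      have hvL : v ∈ tree.getD u [] := (h6 _ hvnew).2
      refine ⟨u, List.mem_append_left _ huq, ?_, (hAdj u v).1 hvL, ?_⟩
      · rw [h4 v]; simp [hvnew]
      · rw [show done ++ u :: rest ++ new = (done ++ u :: rest) ++ new by simp,
          hidx1 u huq, hidx2 v hvnq]
        exact lt_of_lt_of_le (List.idxOf_lt_length_iff.2 huq) (Nat.le_add_left _ _)
  · intro w hw v hvN
    rcases List.mem_append.1 hw with hwd | hwu
    · have hins := hExp w hwd v hvN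
      rw [h4 v]
      by_cases hvn : v ∈ new
      · simp [hvn]
      · simpa [hvn] using hins
    · have hwu2 : w = u := by simpa using hwu
      rw [hwu2] at hvN
      rw [h4 v]
      by_cases hvn : v ∈ new
      · simp [hvn]
      · have hvq : v ∈ done ++ u :: rest := by
          rcases List.mem_append.1 (h7 v hvN) with h | h
          · exact h
          · exact absurd h hvn
        have : parent.contains v = true := (PySem.Dict.contains_iff_mem_keys _ _).2 (by rw [hkeys]; exact hvq)
        rw [PySem.Dict.contains_eq_isSome_get?] at this
        simpa [hvn] using this
  · intro v hv
    rcases List.mem_append.1 hv with hvq | hvnew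
    · exact hBnd v hvq
    · exact Or.inr (bpb_getD_sub tree u (h6 v hvnew).2)

-- A's backtrack walks the parent chain: it yields a path and computes bpbCollectB of it
lemma bpbBackA_path {R : BpbV → BpbV → Prop} {src : BpbV} (hsrc : src.1 ≠ "b")
    {parent : PySem.Dict BpbV (Option BpbV)} {q : List BpbV}
    (hInv : bpbInvA R src parent q) :
    ∀ n, ∀ v ∈ q, q.idxOf v ≤ n →
      ∃ p, bpbIsPath (fun x y => R y x) p v src ∧
        (∀ w ∈ p, w ∈ q ∧ q.idxOf w ≤ q.idxOf v) ∧
        ∀ fuel blocks, n + 2 ≤ fuel → bpbBackA parent fuel blocks (some v) = bpbCollectB p blocks := by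
  obtain ⟨hkeys, hnodup, hhead, hsrcget, hmain⟩ := hInv
  have hsrc_case : ∀ (n : Nat), ∃ p, bpbIsPath (fun x y => R y x) p src src ∧
      (∀ w ∈ p, w ∈ q ∧ q.idxOf w ≤ q.idxOf src) ∧
      ∀ fuel blocks, n + 2 ≤ fuel → bpbBackA parent fuel blocks (some src) = bpbCollectB p blocks := by
    intro n
    have hsrcq : src ∈ q := by
      cases hq : q with
      | nil => simp [hq] at hhead
      | cons a t =>
        rw [hq] at hhead
        simp only [List.head?_cons, Option.some.injEq] at hhead
        rw [← hhead]
        exact List.mem_cons_self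
    refine ⟨[src], ⟨⟨by simp, by simp, by simp⟩, by simp⟩, by simp [hsrcq], ?_⟩
    intro fuel blocks hf
    obtain ⟨f, rfl⟩ : ∃ f, fuel = f + 2 := ⟨fuel - 2, by omega⟩
    simp only [bpbBackA, hsrcget, Option.getD_some, if_neg hsrc]
    cases f with
    | zero => simp [bpbCollectB, if_neg hsrc]
    | succ g => simp [bpbCollectB, if_neg hsrc]
  intro n
  induction n with
  | zero =>
    intro v hv hidx
    have hv0 : q.idxOf v = 0 := Nat.le_zero.1 hidx
    have hvs : v = src := by
      cases hq : q with
      | nil => simp [hq] at hv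
      | cons a t =>
        rw [hq] at hhead hv0 hv
        simp only [List.head?_cons, Option.some.injEq] at hhead
        by_cases hva : v = a
        · rw [hva, hhead]
        · rw [List.idxOf_cons_ne _ (by exact fun h => hva h.symm)] at hv0
          omega
    rw [hvs]
    exact hsrc_case 0
  | succ n ih =>
    intro v hv hidx
    by_cases hvs : v = src
    · rw [hvs]; exact hsrc_case (n + 1)
    · obtain ⟨u, huq, hg, hR, hlt⟩ := hmain v hv hvs
      obtain ⟨p, ⟨⟨hc, hh, hl⟩, hnd⟩, hmem, heq⟩ := ih u huq (by omega)
      refine ⟨v :: p, ⟨⟨?_, by simp, ?_⟩, ?_⟩, ?_, ?_⟩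
      · cases p with
        | nil => simp at hh
        | cons a t =>
          obtain rfl : u = a := by symm; simpa using hh
          exact List.isChain_cons_cons.2 ⟨hR, hc⟩
      · cases p with
        | nil => simp at hh
        | cons a t => simpa using hl
      · refine List.nodup_cons.2 ⟨?_, hnd⟩
        intro hvp
        have := (hmem v hvp).2
        omega
      · intro w hw
        rcases List.mem_cons.1 hw with rfl | hw
        · exact ⟨hv, Nat.le_refl _⟩
        · exact ⟨(hmem w hw).1, le_trans (hmem w hw).2 (by omega)⟩
      · intro fuel blocks hf
        obtain ⟨f, rfl⟩ : ∃ f, fuel = f + 1 := ⟨fuel - 1, by omega⟩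
        simp only [bpbBackA, hg, Option.getD_some, bpbCollectB]
        exact heq f _ (by omega)

-- the main BFS loop lemma
lemma bpbLoopA_main (tree : PySem.Dict BpbV (List BpbV)) (R : BpbV → BpbV → Prop)
    (hAdj : ∀ x y, y ∈ tree.getD x [] ↔ R x y) (src dst : BpbV) :
    ∀ fuel (done rest : List BpbV) (parent : PySem.Dict BpbV (Option BpbV)),
      bpbInvA R src parent (done ++ rest) → bpbExpA tree parent done →
      dst ∉ done → bpbBndA tree src (done ++ rest) →
      tree.values.flatten.length + 2 ≤ fuel + done.length →
      (((bpbLoopA tree dst fuel (parent, done ++ rest) done.length).contains dst = true →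
          ∃ q, bpbInvA R src (bpbLoopA tree dst fuel (parent, done ++ rest) done.length) q ∧ dst ∈ q) ∧
       ((bpbLoopA tree dst fuel (parent, done ++ rest) done.length).contains dst = false →
          ¬ bpbReach R src dst)) := by
  intro fuel
  induction fuel with
  | zero =>
    intro done rest parent hInv hExp hdd hBnd hfuel
    exfalso
    have hlen : (done ++ rest).length ≤ tree.values.flatten.length + 1 :=
      bpb_len_le tree src _ hInv.2.1 hBnd
    have : done.length ≤ (done ++ rest).length := by simp
    omega
  | succ f ih =>
    intro done rest parent hInv hExp hdd hBnd hfuel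
    cases rest with
    | nil =>
      have hloop : bpbLoopA tree dst (f + 1) (parent, done ++ []) done.length = parent := by
        simp [bpbLoopA]
      rw [hloop]
      constructor
      · intro hc
        exact ⟨done ++ [], hInv, by
          have := (PySem.Dict.contains_iff_mem_keys _ _).1 hc
          rwa [hInv.1] at this⟩
      · intro _
        have hsrcq : src ∈ done ++ [] := by
          have hhead := hInv.2.2.1
          cases hq : done ++ [] with
          | nil => simp [hq] at hhead
          | cons a t =>
            rw [hq] at hhead
            simp only [List.head?_cons, Option.some.injEq] at hhead
            rw [← hhead]
            exact List.mem_cons_self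
        refine bpbClosed_no_reach (fun x => x ∈ done) ?_ (by simpa using hsrcq) hdd
        intro x hx y hR
        have hy := hExp x hx y ((hAdj x y).2 hR)
        have hyk : y ∈ parent.keys := by
          rw [← PySem.Dict.contains_iff_mem_keys, PySem.Dict.contains_eq_isSome_get?]
          exact hy
        rw [hInv.1] at hyk
        simpa using hyk
    | cons u rest' =>
      have hlt : done.length < (done ++ u :: rest').length := by
        simp
      have hget : (done ++ u :: rest').getD done.length ("", 0) = u := by
        simp [List.getD]
      have hgoal : bpbLoopA tree dst (f + 1) (parent, done ++ u :: rest') done.length =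
          if u = dst then parent
          else bpbLoopA tree dst f (bpbStepA tree u (parent, done ++ u :: rest')) (done.length + 1) := by
        simp only [bpbLoopA, if_pos hlt, hget]
      rw [hgoal]
      by_cases hud : u = dst
      · rw [if_pos hud]
        constructor
        · intro _
          exact ⟨done ++ u :: rest', hInv, by rw [← hud]; exact List.mem_append_right _ List.mem_cons_self⟩
        · intro hc
          have : parent.contains dst = true := by
            refine (PySem.Dict.contains_iff_mem_keys _ _).2 ?_
            rw [hInv.1, ← hud]
            exact List.mem_append_right _ List.mem_cons_self
          rw [this] at hc
          exact absurd hc (by simp)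
      · rw [if_neg hud]
        obtain ⟨new, hst2, hInv', hExp', hBnd'⟩ :=
          bpbStepA_inv tree R hAdj src u parent done rest' hInv hExp hBnd
        have hpair : bpbStepA tree u (parent, done ++ u :: rest') =
            ((bpbStepA tree u (parent, done ++ u :: rest')).1, (done ++ u :: rest') ++ new) :=
          Prod.ext_iff.2 ⟨rfl, hst2⟩
        have hlist : (done ++ u :: rest') ++ new = (done ++ [u]) ++ (rest' ++ new) := by simp
        rw [hpair, hlist]
        have hlen1 : done.length + 1 = (done ++ [u]).length := by simp
        rw [hlen1]
        have hfe : tree.values.flatten.length + 2 ≤ f + (done ++ [u]).length := by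
          simp only [List.length_append, List.length_cons, List.length_nil]
          omega
        refine ih (done ++ [u]) (rest' ++ new) (bpbStepA tree u (parent, done ++ u :: rest')).1
          (hlist ▸ hInv') hExp' ?_ (hlist ▸ hBnd') hfe
        intro hdm
        rcases List.mem_append.1 hdm with h | h
        · exact hdd h
        · exact hud (by symm; simpa using h)

-- ---- B's DFS produces the (unique) path; completeness on failure ----

def bpbInvB (R : BpbV → BpbV → Prop) (src dst : BpbV) (visited : PySem.Set BpbV)
    (path : List BpbV) : Prop :=
  visited.Nodup ∧ src ∈ visited ∧ path.Nodup ∧ path.IsChain R ∧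
  (path ≠ [] → path.getLast? = some src) ∧
  (∀ x ∈ path, x ∈ visited) ∧
  (∀ x ∈ visited, x ∉ path → ∀ y, R x y → y ∈ visited) ∧
  (dst ∈ visited → path.head? = some dst)

lemma bpb_sub_len {l pool : List BpbV} {src : BpbV}
    (hn : l.Nodup) (hb : ∀ x ∈ l, x = src ∨ x ∈ pool) : l.length ≤ pool.length + 1 := by
  have hs : l ⊆ src :: pool := by
    intro v hv
    rcases hb v hv with h | h
    · simp [h]
    · exact List.mem_cons_of_mem _ h
  simpa using (List.Nodup.subperm hn hs).length_le

lemma bpbLoopB_main (tree : PySem.Dict BpbV (PySem.Set BpbV)) (R : BpbV → BpbV → Prop)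
    (hAdj : ∀ x y, y ∈ tree.getD x PySem.Set.empty ↔ R x y)
    (hsym : ∀ x y, R x y → R y x)
    (src dst : BpbV) (maxV : Nat)
    (hBnd : ∀ x y, R x y → y ∈ tree.values.flatten)
    (hmax : tree.values.flatten.length + 1 ≤ maxV) :
    ∀ fuel (visited : PySem.Set BpbV) (path : List BpbV),
      bpbInvB R src dst visited path →
      (∀ x ∈ visited, x = src ∨ x ∈ tree.values.flatten) →
      2 * (maxV - visited.length) + path.length + 1 ≤ fuel →
      ((∀ bl, bpbLoopB tree dst fuel visited path = some bl →
          ∃ p, bpbIsPath R p dst src ∧ bl = bpbCollectB p PySem.Set.empty) ∧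
       (bpbLoopB tree dst fuel visited path = none → path ≠ [] → ¬ bpbReach R src dst)) := by
  intro fuel
  induction fuel with
  | zero =>
    intro visited path _ _ hf
    exact absurd hf (by omega)
  | succ f ih =>
    intro visited path hInv hVB hf
    obtain ⟨hvn, hsv, hpn, hpc, hplast, hpv, hcl, hdv⟩ := hInv
    cases path with
    | nil =>
      constructor
      · intro bl h
        simp [bpbLoopB] at h
      · intro _ hne
        exact absurd rfl hne
    | cons top rest =>
      have hgoal : bpbLoopB tree dst (f + 1) visited (top :: rest) =
          if top = dst then some (bpbCollectB (top :: rest) PySem.Set.empty)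
          else match (tree.getD top PySem.Set.empty).find? (fun v => !(visited.contains v)) with
            | some v => bpbLoopB tree dst f (PySem.Set.add visited v) (v :: top :: rest)
            | none => bpbLoopB tree dst f visited rest := rfl
      rw [hgoal]
      by_cases htd : top = dst
      · rw [if_pos htd]
        constructor
        · intro bl h
          obtain rfl : bpbCollectB (top :: rest) PySem.Set.empty = bl := by simpa using h
          exact ⟨top :: rest, ⟨⟨hpc, by simp [htd], hplast (by simp)⟩, hpn⟩, rfl⟩
        · intro h
          simp at h
      · rw [if_neg htd]
        have hdnv : dst ∉ visited := fun hd => htd (by simpa using hdv hd)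
        cases hfind : (tree.getD top PySem.Set.empty).find? (fun v => !(visited.contains v)) with
        | some v =>
          have hvmem : v ∈ tree.getD top PySem.Set.empty := List.mem_of_find?_eq_some hfind
          have hvnv : v ∉ visited := by
            have := List.find?_some hfind
            simpa [PySem.Set.contains_iff] using this
          have hRtv : R top v := (hAdj top v).1 hvmem
          have hvp : v ∉ top :: rest := fun hx => hvnv (hpv v hx)
          have hInv' : bpbInvB R src dst (PySem.Set.add visited v) (v :: top :: rest) := by
            refine ⟨PySem.Set.nodup_add _ _ hvn, (PySem.Set.mem_add _ _ _).2 (Or.inl hsv),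
              List.nodup_cons.2 ⟨hvp, hpn⟩,
              List.isChain_cons_cons.2 ⟨hsym top v hRtv, hpc⟩,
              fun _ => by rw [List.getLast?_cons_cons]; exact hplast (by simp), ?_, ?_, ?_⟩
            · intro x hx
              rcases List.mem_cons.1 hx with rfl | hx
              · exact (PySem.Set.mem_add _ _ _).2 (Or.inr rfl)
              · exact (PySem.Set.mem_add _ _ _).2 (Or.inl (hpv x hx))
            · intro x hx hxp y hRxy
              rcases (PySem.Set.mem_add _ _ _).1 hx with hx | rfl
              · refine (PySem.Set.mem_add _ _ _).2 (Or.inl ?_)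
                exact hcl x hx (fun hxo => hxp (List.mem_cons_of_mem _ hxo)) y hRxy
              · exact absurd List.mem_cons_self hxp
            · intro hd
              rcases (PySem.Set.mem_add _ _ _).1 hd with hd | rfl
              · exact absurd hd hdnv
              · simp
          have hVB' : ∀ x ∈ PySem.Set.add visited v, x = src ∨ x ∈ tree.values.flatten := by
            intro x hx
            rcases (PySem.Set.mem_add _ _ _).1 hx with hx | rfl
            · exact hVB x hx
            · exact Or.inr (hBnd top x hRtv)
          have hlen' : (PySem.Set.add visited v).length = visited.length + 1 := by
            rw [PySem.Set.add_of_not_mem hvnv]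
            simp
          have hvb : (PySem.Set.add visited v).length ≤ maxV := by
            refine le_trans (bpb_sub_len (src := src) (PySem.Set.nodup_add _ _ hvn) hVB') ?_
            omega
          have hf' : 2 * (maxV - (PySem.Set.add visited v).length) + (v :: top :: rest).length + 1 ≤ f := by
            rw [hlen']
            simp only [List.length_cons] at hf ⊢
            omega
          obtain ⟨ihs, ihn⟩ := ih (PySem.Set.add visited v) (v :: top :: rest) hInv' hVB' hf'
          exact ⟨ihs, fun h _ => ihn h (by simp)⟩
        | none =>
          have hclosed_top : ∀ y, R top y → y ∈ visited := by
            intro y hRy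
            have hy : y ∈ tree.getD top PySem.Set.empty := (hAdj top y).2 hRy
            have := List.find?_eq_none.1 hfind y hy
            simpa [PySem.Set.contains_iff] using this
          have hInv' : bpbInvB R src dst visited rest := by
            refine ⟨hvn, hsv, (List.nodup_cons.1 hpn).2, hpc.tail, ?_, ?_, ?_, ?_⟩
            · intro hne
              cases rest with
              | nil => exact absurd rfl hne
              | cons a t => rw [← List.getLast?_cons_cons (a := top)]; exact hplast (by simp)
            · exact fun x hx => hpv x (List.mem_cons_of_mem _ hx)
            · intro x hx hxp y hRxy
              by_cases hxt : x = top
              · exact hclosed_top y (hxt ▸ hRxy)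
              · exact hcl x hx (fun hxo => by
                  rcases List.mem_cons.1 hxo with h | h
                  · exact hxt h
                  · exact hxp h) y hRxy
            · intro hd
              exact absurd (by simpa using hdv hd) htd
          have hf' : 2 * (maxV - visited.length) + rest.length + 1 ≤ f := by
            simp only [List.length_cons] at hf
            omega
          obtain ⟨ihs, ihn⟩ := ih visited rest hInv' hVB hf'
          refine ⟨ihs, ?_⟩
          intro hnone _
          cases hrest : rest with
          | cons a t =>
            exact ihn hnone (by simp [hrest])
          | nil =>
            -- the whole component is explored: visited is adjacency-closed
            refine bpbClosed_no_reach (fun x => x ∈ visited) ?_ hsv hdnv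
            intro x hx y hRxy
            by_cases hxt : x = top
            · exact hclosed_top y (hxt ▸ hRxy)
            · refine hcl x hx ?_ y hRxy
              intro hxp
              rcases List.mem_cons.1 hxp with h | h
              · exact hxt h
              · rw [hrest] at h
                simp at h

lemma bpb_getD_subB (tree : PySem.Dict BpbV (PySem.Set BpbV)) (u : BpbV) :
    tree.getD u PySem.Set.empty ⊆ tree.values.flatten := by
  cases h : tree.get? u with
  | none => simp [PySem.Dict.getD_of_get?_eq_none _ _ h, PySem.Set.empty]
  | some l =>
    have hl : l ∈ tree.values := by
      have := PySem.Dict.mem_items_of_get?_eq_some _ h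
      exact List.mem_map_of_mem this
    rw [PySem.Dict.getD_of_get?_eq_some _ _ h]
    intro x hx
    exact List.mem_flatten.2 ⟨l, hl, hx⟩

-- ===== VERDICT (by name: the statement is the Claim_ definition above) =====
theorem block_path_blocks_py_spec : Claim_equal_block_path_blocks_py := by
  intro block_id adj na nb _ hPre
  unfold Spec_block_path_blocks_py block_path_blocks_py block_path_blocks_py_alt
  by_cases hnn : na = nb
  · simp [hnn]
  · simp only [hnn, if_false]
    have hguard : ((bpbNodeBlocksA (bpbBlockNodesA block_id adj)).contains na = true ↔
        (bpbTreeB block_id adj).contains ("n", na) = true) ∧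
        ((bpbNodeBlocksA (bpbBlockNodesA block_id adj)).contains nb = true ↔
        (bpbTreeB block_id adj).contains ("n", nb) = true) :=
      ⟨bpbGuardA_iff.trans bpbGuardB_iff.symm, bpbGuardA_iff.trans bpbGuardB_iff.symm⟩
    have hga : (bpbNodeBlocksA (bpbBlockNodesA block_id adj)).contains na =
        (bpbTreeB block_id adj).contains ("n", na) := by
      rcases Bool.eq_false_or_eq_true ((bpbNodeBlocksA (bpbBlockNodesA block_id adj)).contains na) with h | h <;>
        rcases Bool.eq_false_or_eq_true ((bpbTreeB block_id adj).contains ("n", na)) with h2 | h2 <;>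
        simp_all [hguard.1]
    have hgb : (bpbNodeBlocksA (bpbBlockNodesA block_id adj)).contains nb =
        (bpbTreeB block_id adj).contains ("n", nb) := by
      rcases Bool.eq_false_or_eq_true ((bpbNodeBlocksA (bpbBlockNodesA block_id adj)).contains nb) with h | h <;>
        rcases Bool.eq_false_or_eq_true ((bpbTreeB block_id adj).contains ("n", nb)) with h2 | h2 <;>
        simp_all [hguard.2]
    rw [hga, hgb]
    by_cases hcond : (!((bpbTreeB block_id adj).contains ("n", na)) ||
        !((bpbTreeB block_id adj).contains ("n", nb))) = true
    · rw [if_pos hcond, if_pos hcond]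
    · rw [if_neg hcond, if_neg hcond]
      have hcond' : (!((bpbTreeB block_id adj).contains ("n", na)) ||
          !((bpbTreeB block_id adj).contains ("n", nb))) = false := by
        revert hcond
        cases ((bpbTreeB block_id adj).contains ("n", na)) <;>
          cases ((bpbTreeB block_id adj).contains ("n", nb)) <;> simp
      obtain ⟨hcna, hcnb⟩ : (bpbTreeB block_id adj).contains ("n", na) = true ∧
          (bpbTreeB block_id adj).contains ("n", nb) = true := by
        simpa using hcond'
      have hUP : bpbUP (bpbE (bpbInc block_id adj)) := by
        rcases hPre with h | h | h | h
        · exact absurd h hnn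
        · exact absurd (bpbHead_mem_iff.2 (bpbGuardB_iff.1 hcna)) h
        · exact absurd (bpbHead_mem_iff.2 (bpbGuardB_iff.1 hcnb)) h
        · exact bpbUP_of_acyclic h
      -- abbreviations
      set R := bpbE (bpbInc block_id adj) with hR
      have hsym : ∀ x y, R x y → R y x := fun _ _ h => bpbE_symm h
      have hsrcne : (("n", na) : BpbV) ≠ ("n", nb) := by simp [hnn]
      -- A side
      have hAdjA : ∀ x y, y ∈ (bpbTreeA (bpbNodeBlocksA (bpbBlockNodesA block_id adj))).getD x [] ↔ R x y :=
        fun x y => bpbTreeA_mem_iff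
      have hInv0 : bpbInvA R ("n", na)
          (PySem.Dict.empty.insert (("n", na) : BpbV) none) ([] ++ [("n", na)]) := by
        refine ⟨?_, by simp, by simp, PySem.Dict.get?_insert_self _ _ _, ?_⟩
        · rw [PySem.Dict.keys_insert_of_not_contains _ _ (by simp [PySem.Dict.contains_empty])]
          simp [PySem.Dict.keys_empty]
        · intro v hv hne
          simp only [List.nil_append, List.mem_singleton] at hv
          exact absurd hv hne
      have hExp0 : bpbExpA (bpbTreeA (bpbNodeBlocksA (bpbBlockNodesA block_id adj)))
          (PySem.Dict.empty.insert (("n", na) : BpbV) none) [] := by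
        intro w hw; simp at hw
      have hBnd0 : bpbBndA (bpbTreeA (bpbNodeBlocksA (bpbBlockNodesA block_id adj)))
          ("n", na) ([] ++ [("n", na)]) := by
        intro v hv
        simp only [List.nil_append, List.mem_singleton] at hv
        exact Or.inl hv
      obtain ⟨CA1, CA2⟩ := bpbLoopA_main (bpbTreeA (bpbNodeBlocksA (bpbBlockNodesA block_id adj)))
        R hAdjA ("n", na) ("n", nb) (bpbFuelA (bpbTreeA (bpbNodeBlocksA (bpbBlockNodesA block_id adj))))
        [] [("n", na)] (PySem.Dict.empty.insert (("n", na) : BpbV) none)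
        hInv0 hExp0 (by simp) hBnd0 (by simp [bpbFuelA])
      -- B side
      have hAdjB : ∀ x y, y ∈ (bpbTreeB block_id adj).getD x PySem.Set.empty ↔ R x y :=
        fun x y => bpbTreeB_mem_iff
      have hBndB : ∀ x y, R x y → y ∈ (bpbTreeB block_id adj).values.flatten :=
        fun x y h => bpb_getD_subB _ x ((hAdjB x y).2 h)
      have hInvB0 : bpbInvB R ("n", na) ("n", nb)
          (PySem.Set.add PySem.Set.empty ("n", na)) [("n", na)] := by
        refine ⟨by simp [PySem.Set.add, PySem.Set.empty], by simp [PySem.Set.add, PySem.Set.empty],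
          by simp, by simp, by simp, ?_, ?_, ?_⟩
        · intro x hx
          simpa [PySem.Set.add, PySem.Set.empty] using hx
        · intro x hx hxp
          simp only [PySem.Set.add, PySem.Set.empty] at hx
          exact absurd (by simpa using hx) (by simpa using hxp)
        · intro hd
          simp only [PySem.Set.add, PySem.Set.empty] at hd
          exact absurd (by simpa using hd) (by simpa using hsrcne.symm)
      obtain ⟨CB1, CB2⟩ := bpbLoopB_main (bpbTreeB block_id adj) R hAdjB hsym
        ("n", na) ("n", nb) ((bpbTreeB block_id adj).values.flatten.length + 1) hBndB (le_refl _)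
        (bpbFuelB (bpbTreeB block_id adj))
        (PySem.Set.add PySem.Set.empty ("n", na)) [("n", na)] hInvB0
        (by intro x hx; simp only [PySem.Set.add, PySem.Set.empty] at hx
            exact Or.inl (by simpa using hx))
        (by have h1 : (PySem.Set.add PySem.Set.empty (("n", na) : BpbV)).length = 1 := rfl
            have h2 : bpbFuelB (bpbTreeB block_id adj) =
              2 * (bpbTreeB block_id adj).values.flatten.length + 4 := rfl
            rw [h1, h2]
            simp only [List.length_cons, List.length_nil]
            omega)
      have hform : bpbFinA (bpbLoopA (bpbTreeA (bpbNodeBlocksA (bpbBlockNodesA block_id adj))) ("n", nb)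
          (bpbFuelA (bpbTreeA (bpbNodeBlocksA (bpbBlockNodesA block_id adj))))
          (PySem.Dict.empty.insert (("n", na) : BpbV) none, [("n", na)]) 0) ("n", nb) =
          bpbFinA (bpbLoopA (bpbTreeA (bpbNodeBlocksA (bpbBlockNodesA block_id adj))) ("n", nb)
          (bpbFuelA (bpbTreeA (bpbNodeBlocksA (bpbBlockNodesA block_id adj))))
          (PySem.Dict.empty.insert (("n", na) : BpbV) none, [] ++ [("n", na)]) ([] : List BpbV).length) ("n", nb) := rfl
      rw [hform]
      set P := bpbLoopA (bpbTreeA (bpbNodeBlocksA (bpbBlockNodesA block_id adj))) ("n", nb)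
        (bpbFuelA (bpbTreeA (bpbNodeBlocksA (bpbBlockNodesA block_id adj))))
        (PySem.Dict.empty.insert (("n", na) : BpbV) none, [] ++ [("n", na)]) ([] : List BpbV).length with hP
      rcases Bool.eq_false_or_eq_true (P.contains ("n", nb)) with hPc | hPc
      · -- BFS found dst
        obtain ⟨q, hInvP, hdq⟩ := CA1 hPc
        have hsizeq : P.size = q.length := by
          have hk : P.keys = q := hInvP.1
          rw [← hk]
          simp [PySem.Dict.keys, PySem.Dict.size]
        obtain ⟨pA, hpApath, hpAmem, hpAeq⟩ := bpbBackA_path (by simp) hInvP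
          (q.idxOf ("n", nb)) ("n", nb) hdq (Nat.le_refl _)
        have hreach : bpbReach R ("n", na) ("n", nb) := by
          refine ⟨pA.reverse, ?_, ?_, ?_⟩
          · rw [List.isChain_reverse]
            exact hpApath.1.1
          · rw [List.head?_reverse]
            exact hpApath.1.2.2
          · rw [List.getLast?_reverse]
            exact hpApath.1.2.1
        cases hres : bpbLoopB (bpbTreeB block_id adj) ("n", nb) (bpbFuelB (bpbTreeB block_id adj))
            (PySem.Set.add PySem.Set.empty ("n", na)) [("n", na)] with
        | none => exact absurd hreach (CB2 hres (by simp))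
        | some bl =>
          obtain ⟨pB, hpBpath, hbl⟩ := CB1 bl hres
          have hpA' : bpbIsPath R pA ("n", nb) ("n", na) :=
            ⟨⟨hpApath.1.1.imp (fun x y h => hsym y x h), hpApath.1.2.1, hpApath.1.2.2⟩, hpApath.2⟩
          have hpe : pA = pB := hUP _ _ pA pB hpA' hpBpath
          unfold bpbFinA
          rw [if_pos hPc, hsizeq, hpAeq (q.length + 2) PySem.Set.empty
            (by have := List.idxOf_lt_length_iff.2 hdq; omega)]
          rw [hpe, hbl]
      · -- BFS failed: both return none
        have hnr : ¬ bpbReach R ("n", na) ("n", nb) := CA2 hPc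
        have hBnone : bpbLoopB (bpbTreeB block_id adj) ("n", nb) (bpbFuelB (bpbTreeB block_id adj))
            (PySem.Set.add PySem.Set.empty ("n", na)) [("n", na)] = none := by
          cases hres : bpbLoopB (bpbTreeB block_id adj) ("n", nb) (bpbFuelB (bpbTreeB block_id adj))
              (PySem.Set.add PySem.Set.empty ("n", na)) [("n", na)] with
          | none => rfl
          | some bl =>
            obtain ⟨p, ⟨hw, hnd⟩, -⟩ := CB1 bl hres
            exact absurd (bpbReach_rev hsym ⟨p, hw⟩) hnr
        rw [hBnone]
        unfold bpbFinA
        rw [if_neg (by simp [hPc])]
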